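-- pv_equiv track=rewrite | github.com/MdAbedin/binarysearch | 0301 - 0400/0341 The Meeting Place.py | solve
-- ===== SOURCE A (Python) =====
-- def solve(matrix):
--     dists_and_counts = [[[0,0] for col in row] for row in matrix]
--     ppl_count = 0
--
--     for r in range(len(matrix)):
--         for c in range(len(matrix[0])):
--             if matrix[r][c] == 2:
--                 ppl_count += 1
--                 bfs = deque([[r,c,0]])
--                 seen = {(r,c)}
--
--                 while bfs:
--                     cr,cc,d = bfs.popleft()
--
--                     dists_and_counts[cr][cc][0] += d
--                     dists_and_counts[cr][cc][1] += 1
--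
--                     for nr,nc in [[cr+1,cc],[cr-1,cc],[cr,cc+1],[cr,cc-1]]:
--                         if 0<=nr<len(matrix) and 0<=nc<len(matrix[0]) and matrix[nr][nc] != 1 and (nr,nc) not in seen:
--                             seen.add((nr,nc))
--                             bfs.append([nr,nc,d+1])
--
--     return min(cell[0] for row in dists_and_counts for cell in row if cell[1] == ppl_count)
-- ===== SOURCE B (Python) =====
-- def relax_table(matrix, rows, cols, src):
--     """Distance table from src by Jacobi relaxation (Bellman-Ford style):
--     repeatedly recompute every open cell as min(current, 1 + min of its
--     neighbours' distances) until the table stops changing.  None = unreachable."""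
--     dist = [[None] * cols for _ in range(rows)]
--     dist[src[0]][src[1]] = 0
--     while True:
--         new = []
--         for r in range(rows):
--             new_row = []
--             for c in range(cols):
--                 best = dist[r][c]
--                 if matrix[r][c] != 1:
--                     for nr, nc in ((r + 1, c), (r - 1, c), (r, c + 1), (r, c - 1)):
--                         if 0 <= nr < rows and 0 <= nc < cols and dist[nr][nc] is not None:
--                             cand = dist[nr][nc] + 1
--                             if best is None or cand < best:
--                                 best = cand
--                 new_row.append(best)
--             new.append(new_row)
--         if new == dist:
--             return dist
--         dist = new
--
--
-- def solve(matrix):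
--     rows, cols = len(matrix), len(matrix[0])
--     people = [(r, c) for r in range(rows) for c in range(cols) if matrix[r][c] == 2]
--     tables = [relax_table(matrix, rows, cols, p) for p in people]
--     totals = [sum(t[r][c] for t in tables)
--               for r in range(rows) for c in range(cols)
--               if all(t[r][c] is not None for t in tables)]
--     return min(totals)
-- ===== Notes on version B (the rewrite author's own statement) =====
-- stated objective: alternative
-- what changed: B abandons BFS entirely: per person it computes the distance table by Jacobi/Bellman-Ford relaxation -- repeatedly recomputing every open cell as min(current, 1 + min of neighbour distances) until the table reaches a fixpoint (no queue, no frontier, no seen set) -- then a separate combining pass sums the per-person tables at cells finite in all of them and takes the minimum.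
-- outside the precondition, e.g. on solve([[], [0]]): A returns 0, B raises ValueError; on solve([[0], [0, 0]]): A returns 0, B returns 0
import Mathlib
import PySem

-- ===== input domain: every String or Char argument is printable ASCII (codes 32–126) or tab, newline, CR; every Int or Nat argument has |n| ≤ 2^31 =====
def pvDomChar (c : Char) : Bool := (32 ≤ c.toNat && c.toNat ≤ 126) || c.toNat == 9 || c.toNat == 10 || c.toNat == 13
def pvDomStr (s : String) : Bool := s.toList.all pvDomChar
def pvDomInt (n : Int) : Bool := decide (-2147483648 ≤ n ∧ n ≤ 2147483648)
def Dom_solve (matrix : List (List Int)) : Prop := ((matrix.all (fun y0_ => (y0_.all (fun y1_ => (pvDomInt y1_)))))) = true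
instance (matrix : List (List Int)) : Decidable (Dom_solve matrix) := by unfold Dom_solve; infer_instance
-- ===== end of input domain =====

-- B replaces A's per-person BFS (queue + seen set, accumulating into a shared per-cell matrix)
-- by per-person distance tables computed with Jacobi/Bellman-Ford relaxation to a fixpoint,
-- combined in a separate final pass (objective: alternative algorithm, not faster).

-- ===== PORT A =====
-- matrix[r][c]; exact for the range-checked / Pre_-guarded indices at which A reads it
def pvA_at (matrix : List (List Int)) (r c : Int) : Int :=
  PySem.List.pyGetD (PySem.List.pyGetD matrix r []) c 0

-- the inner 'for nr,nc in [...]' loop of A's BFS, updating (queue, seen)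
def pvA_nbr (matrix : List (List Int)) (cr cc d : Int)
    (qs : List (Int × Int × Int) × PySem.Set (Int × Int)) :
    List (Int × Int × Int) × PySem.Set (Int × Int) :=
  [(cr + 1, cc), (cr - 1, cc), (cr, cc + 1), (cr, cc - 1)].foldl
    (fun qs nb =>
      if 0 ≤ nb.1 ∧ nb.1 < (matrix.length : Int) ∧ 0 ≤ nb.2 ∧
          nb.2 < ((PySem.List.pyGetD matrix 0 []).length : Int) ∧
          pvA_at matrix nb.1 nb.2 ≠ 1 ∧ ¬ nb ∈ qs.2 then
        (qs.1 ++ [(nb.1, nb.2, d + 1)], PySem.Set.add qs.2 nb)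
      else qs) qs

-- dists_and_counts[cr][cc][0] += d; dists_and_counts[cr][cc][1] += 1
-- (toNat is exact: every dequeued coordinate was range-checked nonnegative)
def pvA_bump (m : List (List (Int × Int))) (cr cc d : Int) : List (List (Int × Int)) :=
  m.modify cr.toNat (fun row => row.modify cc.toNat (fun p => (p.1 + d, p.2 + 1)))

-- A's 'while bfs:' loop; the fuel argument is only a totality guard (each cell is enqueued at most once)
def pvA_bfs (matrix : List (List Int)) :
    Nat → List (Int × Int × Int) → PySem.Set (Int × Int) →
    List (List (Int × Int)) → List (List (Int × Int))
  | 0, _, _, m => m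
  | _ + 1, [], _, m => m
  | f + 1, (cr, cc, d) :: q, s, m =>
      pvA_bfs matrix f (pvA_nbr matrix cr cc d (q, s)).1 (pvA_nbr matrix cr cc d (q, s)).2
        (pvA_bump m cr cc d)

def pvA_fuel (matrix : List (List Int)) : Nat :=
  matrix.length * (PySem.List.pyGetD matrix 0 []).length + 1

def solve (matrix : List (List Int)) : Int :=
  let dnc0 := matrix.map (fun row => row.map (fun _ => ((0 : Int), (0 : Int))))
  let res := (PySem.List.pyRange 0 (matrix.length : Int) 1).foldl
    (fun st r => (PySem.List.pyRange 0 ((PySem.List.pyGetD matrix 0 []).length : Int) 1).foldl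
      (fun st c =>
        if pvA_at matrix r c = 2 then
          (st.1 + 1, pvA_bfs matrix (pvA_fuel matrix) [(r, c, 0)]
            (PySem.Set.ofList [(r, c)]) st.2)
        else st) st) ((0 : Int), dnc0)
  let cands := res.2.flatMap (fun row =>
    row.filterMap (fun cell => if cell.2 = res.1 then some cell.1 else none))
  -- min(generator); Python raises ValueError on an empty generator (excluded by Pre_), .getD 0 is unreachable there
  (PySem.List.min? cands (fun x => x)).getD 0

-- ===== PORT B =====
-- one cell of one relaxation round: min(current, 1 + min of neighbours' distances)
def pvB_cell (matrix : List (List Int)) (rows cols : Nat)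
    (dist : List (List (Option Int))) (r c : Nat) : Option Int :=
  if (matrix.getD r []).getD c 0 ≠ 1 then
    [((r : Int) + 1, (c : Int)), ((r : Int) - 1, (c : Int)),
     ((r : Int), (c : Int) + 1), ((r : Int), (c : Int) - 1)].foldl
      (fun (best : Option Int) (nb : Int × Int) =>
        if 0 ≤ nb.1 ∧ nb.1 < (rows : Int) ∧ 0 ≤ nb.2 ∧ nb.2 < (cols : Int) then
          match (dist.getD nb.1.toNat []).getD nb.2.toNat none with
          | some v =>
            match best with
            | none => some (v + 1)
            | some b => if v + 1 < b then some (v + 1) else some b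
          | none => best
        else best) ((dist.getD r []).getD c none)
  else (dist.getD r []).getD c none

-- one full relaxation round: rebuild the whole table
def pvB_round (matrix : List (List Int)) (rows cols : Nat)
    (dist : List (List (Option Int))) : List (List (Option Int)) :=
  (List.range rows).map (fun r => (List.range cols).map (fun c => pvB_cell matrix rows cols dist r c))

-- Source B's 'while True: … if new == dist: return dist'; fuel is only a totality guard
def pvB_relax (matrix : List (List Int)) (rows cols : Nat) :
    Nat → List (List (Option Int)) → List (List (Option Int))
  | 0, dist => dist
  | f + 1, dist =>
    if pvB_round matrix rows cols dist = dist then dist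
    else pvB_relax matrix rows cols f (pvB_round matrix rows cols dist)

def pvB_table (matrix : List (List Int)) (rows cols : Nat) (p : Int × Int) :
    List (List (Option Int)) :=
  pvB_relax matrix rows cols (rows * cols + 1)
    ((List.replicate rows (List.replicate cols (none : Option Int))).modify p.1.toNat
      (fun row => row.modify p.2.toNat (fun _ => some 0)))

def solve_alt (matrix : List (List Int)) : Int :=
  let rows := matrix.length
  let cols := (PySem.List.pyGetD matrix 0 []).length
  let people := (PySem.List.pyRange 0 (rows : Int) 1).flatMap (fun r =>
    (PySem.List.pyRange 0 (cols : Int) 1).filterMap (fun c =>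
      if PySem.List.pyGetD (PySem.List.pyGetD matrix r []) c 0 = 2 then some (r, c) else none))
  let tables := people.map (fun p => pvB_table matrix rows cols p)
  let totals := (PySem.List.pyRange 0 (rows : Int) 1).flatMap (fun r =>
    (PySem.List.pyRange 0 (cols : Int) 1).filterMap (fun c =>
      if tables.all (fun t => ((t.getD r.toNat []).getD c.toNat none).isSome) then
        some ((tables.map (fun t => ((t.getD r.toNat []).getD c.toNat none).getD 0)).sum)
      else none))
  -- min(totals); ValueError on [] is excluded by Pre_, .getD 0 unreachable there
  (PySem.List.min? totals (fun x => x)).getD 0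

-- ===== PRECONDITION & SPEC =====
-- helpers for Pre_ (independent of both ports): cell values, grid cells, people, and plain
-- reachability through non-wall cells as an iterated neighbourhood closure
def pvVal (matrix : List (List Int)) (p : Int × Int) : Int :=
  (matrix.getD p.1.toNat []).getD p.2.toNat 0

def pvInGrid (matrix : List (List Int)) (p : Int × Int) : Bool :=
  decide (0 ≤ p.1) && decide (p.1 < (matrix.length : Int)) &&
    decide (0 ≤ p.2) && decide (p.2 < ((matrix.headD []).length : Int))

def pvExpand (matrix : List (List Int)) (S : List (Int × Int)) : List (Int × Int) :=
  PySem.Set.update S (S.flatMap (fun q =>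
    [(q.1 + 1, q.2), (q.1 - 1, q.2), (q.1, q.2 + 1), (q.1, q.2 - 1)].filter
      (fun n => pvInGrid matrix n && pvVal matrix n != 1)))

def pvReach (matrix : List (List Int)) (p : Int × Int) : List (Int × Int) :=
  (pvExpand matrix)^[matrix.length * (matrix.headD []).length] [p]

def pvCells (matrix : List (List Int)) : List (Int × Int) :=
  (List.range matrix.length).flatMap (fun i =>
    (List.range (matrix.headD []).length).map (fun j => ((i : Int), (j : Int))))

def pvPersons (matrix : List (List Int)) : List (Int × Int) :=
  (pvCells matrix).filter (fun p => pvVal matrix p == 2)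

-- Pre_ excludes (a) non-rectangular matrices, on which A raises IndexError or returns a value
-- produced by scanning cells beyond the first-row width that B's combining pass never visits,
-- and (b) matrices with no cell reachable by every person, on which A's min() raises ValueError.
def Pre_solve (matrix : List (List Int)) : Prop :=
  (∀ row ∈ matrix, row.length = (matrix.headD []).length) ∧ matrix ≠ [] ∧
    ∃ cell ∈ pvCells matrix, ∀ p ∈ pvPersons matrix, cell ∈ pvReach matrix p
instance (matrix : List (List Int)) : Decidable (Pre_solve matrix) := by
  unfold Pre_solve; infer_instance

def pvWitness_solve : List (List Int) := [[2, 0], [0, 2]]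

def Spec_solve (matrix : List (List Int)) (out : Int) : Prop := out = solve_alt matrix
instance (matrix : List (List Int)) (out : Int) : Decidable (Spec_solve matrix out) := by
  unfold Spec_solve; infer_instance

-- ===== CLAIM (what is proved, stated in full; the proofs are below) =====
def Claim_equal_solve : Prop :=
  ∀ (matrix : List (List Int)), Dom_solve matrix → Pre_solve matrix →
    Spec_solve matrix (solve matrix)

-- ===== LEMMAS AND PROOFS =====

-- proof-side abbreviations for a BFS queue entry (r, c, d)
def pvTKey (t : Int × Int × Int) : Int × Int := (t.1, t.2.1)
def pvTVal (t : Int × Int × Int) : Int := t.2.2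

def pvWd (matrix : List (List Int)) : Nat := (PySem.List.pyGetD matrix 0 []).length

def pvInR (matrix : List (List Int)) (p : Int × Int) : Prop :=
  0 ≤ p.1 ∧ p.1 < (matrix.length : Int) ∧ 0 ≤ p.2 ∧ p.2 < (pvWd matrix : Int)

def pvOpen (matrix : List (List Int)) (p : Int × Int) : Prop :=
  pvInR matrix p ∧ pvA_at matrix p.1 p.2 ≠ 1

-- the sequence of (cell, distance) entries a BFS run dequeues
def pvTrace (matrix : List (List Int)) :
    Nat → List (Int × Int × Int) → PySem.Set (Int × Int) → List (Int × Int × Int)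
  | 0, _, _ => []
  | _ + 1, [], _ => []
  | f + 1, t :: q, s =>
      t :: pvTrace matrix f (pvA_nbr matrix t.1 t.2.1 t.2.2 (q, s)).1
        (pvA_nbr matrix t.1 t.2.1 t.2.2 (q, s)).2

-- the neighbour fold appends a block of fresh, pairwise-distinct, in-range cells to queue and seen
theorem pvNbr_spec (matrix : List (List Int)) (d : Int) :
    ∀ (nbs : List (Int × Int)) (q : List (Int × Int × Int)) (s : PySem.Set (Int × Int)),
    ∃ ext : List (Int × Int),
      (nbs.foldl (fun qs nb =>
        if 0 ≤ nb.1 ∧ nb.1 < (matrix.length : Int) ∧ 0 ≤ nb.2 ∧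
            nb.2 < ((PySem.List.pyGetD matrix 0 []).length : Int) ∧
            pvA_at matrix nb.1 nb.2 ≠ 1 ∧ ¬ nb ∈ qs.2 then
          (qs.1 ++ [(nb.1, nb.2, d + 1)], PySem.Set.add qs.2 nb)
        else qs) (q, s)) = (q ++ ext.map (fun n => (n.1, n.2, d + 1)), s ++ ext) ∧
      ext.Nodup ∧ ∀ n ∈ ext, n ∉ s ∧ pvInR matrix n := by
  intro nbs
  induction nbs with
  | nil => intro q s; exact ⟨[], by simp, List.nodup_nil, by simp⟩
  | cons nb nbs ih =>
    intro q s
    by_cases h : 0 ≤ nb.1 ∧ nb.1 < (matrix.length : Int) ∧ 0 ≤ nb.2 ∧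
        nb.2 < ((PySem.List.pyGetD matrix 0 []).length : Int) ∧
        pvA_at matrix nb.1 nb.2 ≠ 1 ∧ ¬ nb ∈ s
    · have hadd : PySem.Set.add s nb = s ++ [nb] := by
        simp [PySem.Set.add, PySem.Set.contains, h.2.2.2.2.2]
      obtain ⟨ext, heq, hnd, hext⟩ := ih (q ++ [(nb.1, nb.2, d + 1)]) (s ++ [nb])
      refine ⟨nb :: ext, ?_, ?_, ?_⟩
      · simpa [List.foldl_cons, h, hadd, List.append_assoc] using heq
      · refine List.nodup_cons.2 ⟨fun hmem => ?_, hnd⟩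
        exact (hext nb hmem).1 (by simp)
      · intro n hn
        rcases List.mem_cons.1 hn with rfl | hn
        · exact ⟨h.2.2.2.2.2, h.1, h.2.1, h.2.2.1, h.2.2.2.1⟩
        · obtain ⟨hns, hinr⟩ := hext n hn
          exact ⟨fun hc => hns (by simp [hc]), hinr⟩
    · obtain ⟨ext, heq, hnd, hext⟩ := ih q s
      exact ⟨ext, by simpa [List.foldl_cons, h] using heq, hnd, hext⟩

theorem pvA_nbr_spec (matrix : List (List Int)) (t : Int × Int × Int)
    (q : List (Int × Int × Int)) (s : PySem.Set (Int × Int)) :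
    ∃ ext : List (Int × Int),
      pvA_nbr matrix t.1 t.2.1 t.2.2 (q, s)
        = (q ++ ext.map (fun n => (n.1, n.2, t.2.2 + 1)), s ++ ext) ∧
      ext.Nodup ∧ ∀ n ∈ ext, n ∉ s ∧ pvInR matrix n := by
  simpa only [pvA_nbr] using
    pvNbr_spec matrix t.2.2 [(t.1 + 1, t.2.1), (t.1 - 1, t.2.1), (t.1, t.2.1 + 1), (t.1, t.2.1 - 1)] q s

-- BFS invariant: the dequeued cells are pairwise distinct and in range
theorem pvTrace_inv (matrix : List (List Int)) :
    ∀ (f : Nat) (q : List (Int × Int × Int)) (s : PySem.Set (Int × Int)),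
      (q.map pvTKey).Nodup → (∀ t ∈ q, pvTKey t ∈ s) → (∀ t ∈ q, pvInR matrix (pvTKey t)) →
      ((pvTrace matrix f q s).map pvTKey).Nodup ∧
      (∀ t ∈ pvTrace matrix f q s, pvInR matrix (pvTKey t)) ∧
      (∀ t ∈ pvTrace matrix f q s, pvTKey t ∈ q.map pvTKey ∨ pvTKey t ∉ s) := by
  intro f
  induction f with
  | zero => intro q s _ _ _; exact ⟨by simp [pvTrace], by simp [pvTrace], by simp [pvTrace]⟩
  | succ f ih =>
    intro q s hnd hins hinr
    cases q with
    | nil => exact ⟨by simp [pvTrace], by simp [pvTrace], by simp [pvTrace]⟩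
    | cons t q =>
      obtain ⟨ext, heq, hextnd, hext⟩ := pvA_nbr_spec matrix t q s
      have hq1 : (pvA_nbr matrix t.1 t.2.1 t.2.2 (q, s)).1
          = q ++ ext.map (fun n => (n.1, n.2, t.2.2 + 1)) := by rw [heq]
      have hq2 : (pvA_nbr matrix t.1 t.2.1 t.2.2 (q, s)).2 = s ++ ext := by rw [heq]
      have hkeys : (q ++ ext.map (fun n => (n.1, n.2, t.2.2 + 1))).map pvTKey
          = q.map pvTKey ++ ext := by
        simp [pvTKey, Function.comp_def]
      have hndq : (q.map pvTKey).Nodup := (List.nodup_cons.1 (by simpa using hnd)).2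
      have htq : pvTKey t ∉ q.map pvTKey := (List.nodup_cons.1 (by simpa using hnd)).1
      have hts : pvTKey t ∈ s := hins t (by simp)
      have h1 : ((q ++ ext.map (fun n => (n.1, n.2, t.2.2 + 1))).map pvTKey).Nodup := by
        rw [hkeys]
        refine hndq.append hextnd ?_
        intro k hk1 hk2
        obtain ⟨x, hx, rfl⟩ := List.mem_map.1 hk1
        exact (hext _ hk2).1 (hins x (List.mem_cons_of_mem _ hx))
      have h2 : ∀ x ∈ q ++ ext.map (fun n => (n.1, n.2, t.2.2 + 1)), pvTKey x ∈ s ++ ext := by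
        intro x hx
        rcases List.mem_append.1 hx with hx | hx
        · exact List.mem_append.2 (Or.inl (hins x (List.mem_cons_of_mem _ hx)))
        · obtain ⟨n, hn, rfl⟩ := List.mem_map.1 hx
          exact List.mem_append.2 (Or.inr (by simpa [pvTKey] using hn))
      have h3 : ∀ x ∈ q ++ ext.map (fun n => (n.1, n.2, t.2.2 + 1)), pvInR matrix (pvTKey x) := by
        intro x hx
        rcases List.mem_append.1 hx with hx | hx
        · exact hinr x (List.mem_cons_of_mem _ hx)
        · obtain ⟨n, hn, rfl⟩ := List.mem_map.1 hx
          simpa [pvTKey] using (hext n hn).2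
      obtain ⟨ndR, inrR, keyR⟩ :=
        ih (q ++ ext.map (fun n => (n.1, n.2, t.2.2 + 1))) (s ++ ext) h1 h2 h3
      have htrace : pvTrace matrix (f + 1) (t :: q) s
          = t :: pvTrace matrix f (pvA_nbr matrix t.1 t.2.1 t.2.2 (q, s)).1
            (pvA_nbr matrix t.1 t.2.1 t.2.2 (q, s)).2 := by
        simp [pvTrace]
      rw [htrace, hq1, hq2]
      refine ⟨?_, ?_, ?_⟩
      · simp only [List.map_cons, List.nodup_cons]
        refine ⟨?_, ndR⟩
        intro hmem
        obtain ⟨x, hxR, hkx⟩ := List.mem_map.1 hmem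
        rcases keyR x hxR with hq' | hns'
        · rw [hkeys] at hq'
          rcases List.mem_append.1 hq' with hq' | hext'
          · rw [hkx] at hq'; exact htq hq'
          · rw [hkx] at hext'; exact (hext _ hext').1 hts
        · rw [hkx] at hns'
          exact hns' (List.mem_append.2 (Or.inl hts))
      · intro x hx
        rcases List.mem_cons.1 hx with rfl | hx
        · exact hinr x (by simp)
        · exact inrR x hx
      · intro x hx
        rcases List.mem_cons.1 hx with rfl | hx
        · exact Or.inl (by simp)
        · rcases keyR x hx with hq' | hns'
          · rw [hkeys] at hq'
            rcases List.mem_append.1 hq' with hq' | hext'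
            · exact Or.inl (by simp only [List.map_cons]; exact List.mem_cons_of_mem _ hq')
            · exact Or.inr (hext _ hext').1
          · exact Or.inr (fun hc => hns' (List.mem_append.2 (Or.inl hc)))

-- A's BFS loop is the fold of its per-entry action over the dequeue sequence
theorem pvA_bfs_eq_trace (matrix : List (List Int)) :
    ∀ (f : Nat) (q : List (Int × Int × Int)) (s : PySem.Set (Int × Int))
      (m : List (List (Int × Int))),
      pvA_bfs matrix f q s m
        = (pvTrace matrix f q s).foldl (fun m t => pvA_bump m t.1 t.2.1 t.2.2) m := by
  intro f
  induction f with
  | zero => intro q s m; cases q <;> simp [pvA_bfs, pvTrace]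
  | succ f ih =>
    intro q s m
    cases q with
    | nil => simp [pvA_bfs, pvTrace]
    | cons t q =>
      obtain ⟨cr, cc, d⟩ := t
      simp only [pvA_bfs, pvTrace, List.foldl_cons]
      exact ih _ _ _

-- cell (i, j) of a dists_and_counts matrix
def pvGC (m : List (List (Int × Int))) (i j : Nat) : Int × Int :=
  (m[i]?.getD [])[j]?.getD ((0 : Int), (0 : Int))

def pvShape (matrix : List (List Int)) (m : List (List (Int × Int))) : Prop :=
  m.length = matrix.length ∧ ∀ (i : Nat) (h : i < m.length), m[i].length = pvWd matrix

theorem pvBump_row (m : List (List (Int × Int))) (cr cc d : Int) (i : Nat) :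
    (pvA_bump m cr cc d)[i]? =
      (fun row => if cr.toNat = i then row.modify cc.toNat (fun p => (p.1 + d, p.2 + 1))
        else row) <$> m[i]? := by
  simpa [pvA_bump, Option.map_apply] using
    List.getElem?_modify (fun row => List.modify row cc.toNat (fun p => (p.1 + d, p.2 + 1)))
      cr.toNat m i

theorem pvShape_bump (matrix : List (List Int)) (m : List (List (Int × Int)))
    (cr cc d : Int) (h : pvShape matrix m) : pvShape matrix (pvA_bump m cr cc d) := by
  obtain ⟨hlen, hrow⟩ := h
  refine ⟨by simpa [pvA_bump, List.length_modify] using hlen, ?_⟩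
  intro i hi
  have hi' : i < m.length := by simpa [pvA_bump, List.length_modify] using hi
  have e := pvBump_row m cr cc d i
  rw [List.getElem?_eq_getElem hi, List.getElem?_eq_getElem hi'] at e
  simp only [Option.map_apply, Option.map_some] at e
  have e' := Option.some.inj e
  rw [e']
  split_ifs <;> simp [List.length_modify, hrow i hi']

theorem pvGC_bump (matrix : List (List Int)) (m : List (List (Int × Int)))
    (cr cc d : Int) (i j : Nat) (hm : pvShape matrix m) (hr : pvInR matrix (cr, cc))
    (hi : i < matrix.length) (hj : j < pvWd matrix) :
    pvGC (pvA_bump m cr cc d) i j =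
      if (cr, cc) = ((i : Int), (j : Int)) then
        ((pvGC m i j).1 + d, (pvGC m i j).2 + 1)
      else pvGC m i j := by
  obtain ⟨hlen, hrow⟩ := hm
  obtain ⟨hcr0, hcrR, hcc0, hccW⟩ := hr
  have hi' : i < m.length := by rw [hlen]; exact hi
  have hj' : j < (m[i]'hi').length := by rw [hrow i hi']; exact hj
  have e := pvBump_row m cr cc d i
  rw [List.getElem?_eq_getElem hi'] at e
  have hgc : pvGC m i j = (m[i]'hi')[j]'hj' := by
    unfold pvGC
    rw [List.getElem?_eq_getElem hi']
    simp [List.getElem?_eq_getElem hj']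
  rw [hgc]
  unfold pvGC
  rw [e]
  simp only [Option.map_apply, Option.map_some, Option.getD_some]
  by_cases h1 : cr.toNat = i
  · rw [if_pos h1]
    have e2 := List.getElem?_modify (fun p => (p.1 + d, p.2 + 1)) cc.toNat (m[i]'hi') j
    rw [List.getElem?_eq_getElem hj'] at e2
    rw [e2]
    simp only [Option.map_apply, Option.map_some, Option.getD_some]
    by_cases h2 : cc.toNat = j
    · have econd : (cr, cc) = ((i : Int), (j : Int)) := by
        simp only [Prod.mk.injEq]; omega
      rw [if_pos econd, if_pos h2]
    · have econd : ¬ ((cr, cc) = ((i : Int), (j : Int))) := by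
        simp only [Prod.mk.injEq]; omega
      rw [if_neg econd, if_neg h2]
  · rw [if_neg h1]
    have econd : ¬ ((cr, cc) = ((i : Int), (j : Int))) := by
      simp only [Prod.mk.injEq]; omega
    rw [if_neg econd]
    simp [List.getElem?_eq_getElem hj']

def pvTsum (tr : List (Int × Int × Int)) (k : Int × Int) : Int :=
  ((tr.filter (fun t => pvTKey t == k)).map pvTVal).sum

def pvTcnt (tr : List (Int × Int × Int)) (k : Int × Int) : Int :=
  (tr.countP (fun t => pvTKey t == k) : Int)

theorem pvShape_foldl_bump (matrix : List (List Int)) (tr : List (Int × Int × Int)) :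
    ∀ (m : List (List (Int × Int))), pvShape matrix m →
      pvShape matrix (tr.foldl (fun m t => pvA_bump m t.1 t.2.1 t.2.2) m) := by
  induction tr with
  | nil => intro m hm; simpa using hm
  | cons t tr ih =>
    intro m hm
    simp only [List.foldl_cons]
    exact ih _ (pvShape_bump matrix m t.1 t.2.1 t.2.2 hm)

theorem pvGC_foldl_bump (matrix : List (List Int)) (tr : List (Int × Int × Int))
    (i j : Nat) (hi : i < matrix.length) (hj : j < pvWd matrix) :
    ∀ (m : List (List (Int × Int))), pvShape matrix m →
      (∀ t ∈ tr, pvInR matrix (pvTKey t)) →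
      pvGC (tr.foldl (fun m t => pvA_bump m t.1 t.2.1 t.2.2) m) i j =
        ((pvGC m i j).1 + pvTsum tr ((i : Int), (j : Int)),
         (pvGC m i j).2 + pvTcnt tr ((i : Int), (j : Int))) := by
  induction tr with
  | nil => intro m hm _; simp [pvTsum, pvTcnt]
  | cons t tr ih =>
    intro m hm hinr
    simp only [List.foldl_cons]
    rw [ih _ (pvShape_bump matrix m t.1 t.2.1 t.2.2 hm) (fun x hx => hinr x (List.mem_cons_of_mem _ hx))]
    have hb := pvGC_bump matrix m t.1 t.2.1 t.2.2 i j hm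
      (by simpa [pvTKey] using hinr t (by simp)) hi hj
    by_cases hk : pvTKey t = ((i : Int), (j : Int))
    · have hk' : (t.1, t.2.1) = ((i : Int), (j : Int)) := hk
      rw [hb, if_pos hk']
      have hbt : (pvTKey t == ((i : Int), (j : Int))) = true := by simp [hk]
      simp only [pvTsum, pvTcnt, List.filter_cons, List.countP_cons, hbt, if_true,
        List.map_cons, List.sum_cons, Prod.mk.injEq]
      constructor
      · simp only [pvTVal]; ring
      · push_cast; ring
    · have hk' : ¬ ((t.1, t.2.1) = ((i : Int), (j : Int))) := hk
      rw [hb, if_neg hk']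
      have hne : (pvTKey t == ((i : Int), (j : Int))) = false := by
        simpa using hk
      simp only [pvTsum, pvTcnt, List.filter_cons, List.countP_cons, hne]
      simp

-- per-person dequeue sequence, and its properties
def pvTraceP (matrix : List (List Int)) (p : Int × Int) : List (Int × Int × Int) :=
  pvTrace matrix (pvA_fuel matrix) [(p.1, p.2, 0)] (PySem.Set.ofList [p])

theorem pvTraceP_inv (matrix : List (List Int)) (p : Int × Int) (hp : pvInR matrix p) :
    ((pvTraceP matrix p).map pvTKey).Nodup ∧
    (∀ t ∈ pvTraceP matrix p, pvInR matrix (pvTKey t)) := by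
  obtain ⟨h1, h2, _⟩ := pvTrace_inv matrix (pvA_fuel matrix) [(p.1, p.2, 0)]
    (PySem.Set.ofList [p]) (by simp) (by
      intro t ht
      rcases List.mem_singleton.1 ht with rfl
      simp [pvTKey, PySem.Set.mem_ofList]) (by
      intro t ht
      rcases List.mem_singleton.1 ht with rfl
      simpa [pvTKey] using hp)
  exact ⟨h1, h2⟩

-- the people list, row-major
def pvPeople (matrix : List (List Int)) : List (Int × Int) :=
  (PySem.List.pyRange 0 (matrix.length : Int) 1).flatMap (fun r =>
    (PySem.List.pyRange 0 ((PySem.List.pyGetD matrix 0 []).length : Int) 1).filterMap (fun c =>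
      if pvA_at matrix r c = 2 then some (r, c) else none))

theorem pvPeople_inR (matrix : List (List Int)) (p : Int × Int)
    (hp : p ∈ pvPeople matrix) : pvInR matrix p := by
  unfold pvPeople at hp
  simp only [List.mem_flatMap, List.mem_filterMap, PySem.List.mem_pyRange_one] at hp
  obtain ⟨r, hr, c, hc, hif⟩ := hp
  by_cases h : pvA_at matrix r c = 2
  · rw [if_pos h] at hif
    obtain rfl := Option.some.inj hif
    exact ⟨hr.1, hr.2, hc.1, hc.2⟩
  · rw [if_neg h] at hif; cases hif

theorem pvPeople_open (matrix : List (List Int)) (p : Int × Int)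
    (hp : p ∈ pvPeople matrix) : pvOpen matrix p := by
  refine ⟨pvPeople_inR matrix p hp, ?_⟩
  unfold pvPeople at hp
  simp only [List.mem_flatMap, List.mem_filterMap, PySem.List.mem_pyRange_one] at hp
  obtain ⟨r, hr, c, hc, hif⟩ := hp
  by_cases h : pvA_at matrix r c = 2
  · rw [if_pos h] at hif
    obtain rfl := Option.some.inj hif
    simp only [h]
    omega
  · rw [if_neg h] at hif; cases hif

-- a for-loop skipping non-matching elements is a fold over the matches
theorem pvFoldl_filterMap_if {α β γ : Type} (l : List α) (P : α → Prop) [DecidablePred P]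
    (h : α → β) (g : γ → β → γ) :
    ∀ (init : γ),
      (l.filterMap (fun x => if P x then some (h x) else none)).foldl g init
        = l.foldl (fun acc x => if P x then g acc (h x) else acc) init := by
  induction l with
  | nil => intro init; simp
  | cons x l ih =>
    intro init
    by_cases hx : P x
    · simp only [List.filterMap_cons, if_pos hx, List.foldl_cons]
      exact ih _
    · simp only [List.filterMap_cons, if_neg hx, List.foldl_cons]
      exact ih _

-- A's person scan is the fold of its body over pvPeople
def pvMFin (matrix : List (List Int)) : List (List (Int × Int)) :=
  (pvPeople matrix).foldl (fun m p =>
    pvA_bfs matrix (pvA_fuel matrix) [(p.1, p.2, 0)] (PySem.Set.ofList [(p.1, p.2)]) m)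
    (matrix.map (fun row => row.map (fun _ => ((0 : Int), (0 : Int)))))

theorem pvResA_eq (matrix : List (List Int)) :
    ((PySem.List.pyRange 0 (matrix.length : Int) 1).foldl
      (fun st r => (PySem.List.pyRange 0 ((PySem.List.pyGetD matrix 0 []).length : Int) 1).foldl
        (fun st c =>
          if pvA_at matrix r c = 2 then
            (st.1 + 1, pvA_bfs matrix (pvA_fuel matrix) [(r, c, 0)]
              (PySem.Set.ofList [(r, c)]) st.2)
          else st) st)
      ((0 : Int), matrix.map (fun row => row.map (fun _ => ((0 : Int), (0 : Int))))))
    = (((pvPeople matrix).length : Int), pvMFin matrix) := by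
  have hout : (fun (st : Int × List (List (Int × Int))) (r : Int) =>
      (PySem.List.pyRange 0 ((PySem.List.pyGetD matrix 0 []).length : Int) 1).foldl
        (fun st c =>
          if pvA_at matrix r c = 2 then
            (st.1 + 1, pvA_bfs matrix (pvA_fuel matrix) [(r, c, 0)]
              (PySem.Set.ofList [(r, c)]) st.2)
          else st) st)
    = (fun st r =>
      ((PySem.List.pyRange 0 ((PySem.List.pyGetD matrix 0 []).length : Int) 1).filterMap
        (fun c => if pvA_at matrix r c = 2 then some (r, c) else none)).foldl
        (fun (st : Int × List (List (Int × Int))) (p : Int × Int) =>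
          (st.1 + 1, pvA_bfs matrix (pvA_fuel matrix) [(p.1, p.2, 0)]
            (PySem.Set.ofList [(p.1, p.2)]) st.2)) st) := by
    funext st r
    rw [pvFoldl_filterMap_if (PySem.List.pyRange 0 ((PySem.List.pyGetD matrix 0 []).length : Int) 1)
      (fun c => pvA_at matrix r c = 2) (fun c => (r, c))
      (fun (st : Int × List (List (Int × Int))) (p : Int × Int) =>
        (st.1 + 1, pvA_bfs matrix (pvA_fuel matrix) [(p.1, p.2, 0)]
          (PySem.Set.ofList [(p.1, p.2)]) st.2)) st]
  rw [hout, ← List.foldl_flatMap]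
  show (pvPeople matrix).foldl _ _ = _
  rw [PySem.List.foldl_prod_mk (f := fun (a : Int) (_ : Int × Int) => a + 1)
    (g := fun m (p : Int × Int) =>
      pvA_bfs matrix (pvA_fuel matrix) [(p.1, p.2, 0)] (PySem.Set.ofList [(p.1, p.2)]) m)]
  refine Prod.ext ?_ rfl
  show (pvPeople matrix).foldl (fun a _ => a + 1) 0 = ((pvPeople matrix).length : Int)
  rw [PySem.List.foldl_add (pvPeople matrix) (fun _ => (1 : Int)) 0,
    PySem.List.sum_map_const_int]
  ring

theorem pvShape_dnc0 (matrix : List (List Int))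
    (hrect : ∀ row ∈ matrix, row.length = pvWd matrix) :
    pvShape matrix (matrix.map (fun row => row.map (fun _ => ((0 : Int), (0 : Int))))) := by
  refine ⟨by simp, ?_⟩
  intro i hi
  have hi' : i < matrix.length := by simpa using hi
  simp only [List.getElem_map, List.length_map]
  exact hrect _ (List.getElem_mem hi')

theorem pvGC_dnc0 (matrix : List (List Int)) (i j : Nat) :
    pvGC (matrix.map (fun row => row.map (fun _ => ((0 : Int), (0 : Int))))) i j = (0, 0) := by
  unfold pvGC
  cases hh : matrix[i]? with
  | none => simp [List.getElem?_map, hh]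
  | some r =>
    simp only [List.getElem?_map, hh, Option.map_some, Option.getD_some]
    cases r[j]? <;> simp

theorem pvShape_people_fold (matrix : List (List Int)) :
    ∀ (ps : List (Int × Int)) (m : List (List (Int × Int))), pvShape matrix m →
      pvShape matrix (ps.foldl (fun m p =>
        pvA_bfs matrix (pvA_fuel matrix) [(p.1, p.2, 0)] (PySem.Set.ofList [(p.1, p.2)]) m) m) := by
  intro ps
  induction ps with
  | nil => intro m hm; simpa using hm
  | cons p ps ih =>
    intro m hm
    simp only [List.foldl_cons]
    refine ih _ ?_
    rw [pvA_bfs_eq_trace matrix _ _ _ m]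
    exact pvShape_foldl_bump matrix _ m hm

theorem pvGC_people_fold (matrix : List (List Int)) (i j : Nat)
    (hi : i < matrix.length) (hj : j < pvWd matrix) :
    ∀ (ps : List (Int × Int)), (∀ p ∈ ps, pvInR matrix p) →
    ∀ (m : List (List (Int × Int))), pvShape matrix m →
      pvGC (ps.foldl (fun m p =>
        pvA_bfs matrix (pvA_fuel matrix) [(p.1, p.2, 0)] (PySem.Set.ofList [(p.1, p.2)]) m) m) i j
        = ((pvGC m i j).1 + (ps.map (fun p => pvTsum (pvTraceP matrix p) ((i : Int), (j : Int)))).sum,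
           (pvGC m i j).2 + (ps.map (fun p => pvTcnt (pvTraceP matrix p) ((i : Int), (j : Int)))).sum) := by
  intro ps
  induction ps with
  | nil => intro _ m hm; simp
  | cons p ps ih =>
    intro hmem m hm
    simp only [List.foldl_cons]
    have hp := hmem p (by simp)
    have hbfs : pvA_bfs matrix (pvA_fuel matrix) [(p.1, p.2, 0)] (PySem.Set.ofList [(p.1, p.2)]) m
        = (pvTraceP matrix p).foldl (fun m t => pvA_bump m t.1 t.2.1 t.2.2) m :=
      pvA_bfs_eq_trace matrix _ _ _ m
    rw [ih (fun x hx => hmem x (List.mem_cons_of_mem _ hx)) _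
      (by rw [hbfs]; exact pvShape_foldl_bump matrix _ m hm)]
    rw [hbfs, pvGC_foldl_bump matrix _ i j hi hj m hm (pvTraceP_inv matrix p hp).2]
    simp only [List.map_cons, List.sum_cons]
    refine Prod.ext ?_ ?_ <;> simp <;> ring

theorem pvGC_mFin (matrix : List (List Int))
    (hrect : ∀ row ∈ matrix, row.length = pvWd matrix)
    (i j : Nat) (hi : i < matrix.length) (hj : j < pvWd matrix) :
    pvGC (pvMFin matrix) i j =
      (((pvPeople matrix).map (fun p => pvTsum (pvTraceP matrix p) ((i : Int), (j : Int)))).sum,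
       ((pvPeople matrix).map (fun p => pvTcnt (pvTraceP matrix p) ((i : Int), (j : Int)))).sum) := by
  unfold pvMFin
  rw [pvGC_people_fold matrix i j hi hj (pvPeople matrix)
    (fun p hp => pvPeople_inR matrix p hp) _ (pvShape_dnc0 matrix hrect)]
  rw [pvGC_dnc0]
  simp

theorem pvShape_mFin (matrix : List (List Int))
    (hrect : ∀ row ∈ matrix, row.length = pvWd matrix) :
    pvShape matrix (pvMFin matrix) := by
  unfold pvMFin
  exact pvShape_people_fold matrix _ _ (pvShape_dnc0 matrix hrect)

-- with distinct keys, the filtered distance sum at a present key is its unique stored value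
theorem pvSum_filter_nodup (l : List (Int × Int × Int)) (k : Int × Int)
    (hnd : (l.map pvTKey).Nodup) (hk : k ∈ l.map pvTKey) :
    ∀ v, (k, v) ∈ l.map (fun t => (pvTKey t, pvTVal t)) → pvTsum l k = v := by
  induction l with
  | nil => simp at hk
  | cons a l ih =>
    intro v hv
    have hnd2 : (pvTKey a :: l.map pvTKey).Nodup := by
      simpa only [List.map_cons] using hnd
    have hnd' := List.nodup_cons.1 hnd2
    simp only [List.map_cons, List.mem_cons] at hv
    by_cases hak : pvTKey a = k
    · have hfl : l.filter (fun t => pvTKey t == k) = [] := by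
        rw [List.filter_eq_nil_iff]
        intro t ht hb
        have hkt : pvTKey t = k := by simpa using hb
        exact hnd'.1 (by rw [hak, ← hkt]; exact List.mem_map_of_mem ht)
      have hv' : v = pvTVal a := by
        rcases hv with h | h
        · simpa using congrArg Prod.snd h
        · exfalso
          obtain ⟨t, ht, hpair⟩ := List.mem_map.1 h
          have hkt : pvTKey t = k := by simpa using congrArg Prod.fst hpair
          exact hnd'.1 (by rw [hak, ← hkt]; exact List.mem_map_of_mem ht)
      have hba : (pvTKey a == k) = true := by simpa using hak
      simp [pvTsum, hba, hfl, hv']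
    · have hba : (pvTKey a == k) = false := by simpa using hak
      have hk' : k ∈ l.map pvTKey := by
        simp only [List.map_cons, List.mem_cons] at hk
        rcases hk with h | h
        · exact absurd h.symm hak
        · exact h
      have hv2 : (k, v) ∈ l.map (fun t => (pvTKey t, pvTVal t)) := by
        rcases hv with h | h
        · exact absurd (by simpa using congrArg Prod.fst h : k = pvTKey a).symm hak
        · exact h
      have := ih hnd'.2 hk' v hv2
      simpa [pvTsum, List.filter_cons, hba] using this

theorem pvTcnt_nodup (l : List (Int × Int × Int)) (k : Int × Int)
    (hnd : (l.map pvTKey).Nodup) :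
    pvTcnt l k = if k ∈ l.map pvTKey then 1 else 0 := by
  unfold pvTcnt
  have hc : l.countP (fun t => pvTKey t == k) = (l.map pvTKey).count k := by
    rw [List.count, List.countP_map]
    rfl
  rw [hc]
  by_cases hmem : k ∈ l.map pvTKey
  · rw [if_pos hmem, List.count_eq_one_of_mem hnd hmem]; rfl
  · rw [if_neg hmem, List.count_eq_zero.2 hmem]; rfl

theorem pvSum_ones_le {α : Type} (l : List α) (f : α → Int)
    (h : ∀ x ∈ l, f x = 0 ∨ f x = 1) :
    0 ≤ (l.map f).sum ∧ (l.map f).sum ≤ (l.length : Int) := by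
  induction l with
  | nil => simp
  | cons b l ihp =>
    have hfb := h b (by simp)
    have := ihp (fun x hx => h x (List.mem_cons_of_mem _ hx))
    simp only [List.map_cons, List.sum_cons, List.length_cons]
    push_cast
    omega

-- a sum of 0/1 terms over a list equals its length iff every term is 1
theorem pvSum_ones_iff {α : Type} (l : List α) (f : α → Int)
    (h : ∀ x ∈ l, f x = 0 ∨ f x = 1) :
    ((l.map f).sum = (l.length : Int)) ↔ ∀ x ∈ l, f x = 1 := by
  induction l with
  | nil => simp
  | cons a l ih =>
    have hfa := h a (by simp)
    have haux := pvSum_ones_le l f (fun x hx => h x (List.mem_cons_of_mem _ hx))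
    have ihl := ih (fun x hx => h x (List.mem_cons_of_mem _ hx))
    simp only [List.map_cons, List.sum_cons, List.length_cons, List.forall_mem_cons]
    push_cast
    constructor
    · intro H
      have h1 : f a = 1 ∧ (l.map f).sum = (l.length : Int) := by omega
      exact ⟨h1.1, ihl.1 h1.2⟩
    · rintro ⟨h1, h2⟩
      have := ihl.2 h2
      omega

-- a shaped matrix, traversed row by row, is its table of cells
theorem pvRows_eq (matrix : List (List Int)) (m : List (List (Int × Int)))
    (hm : pvShape matrix m) :
    m = (List.range matrix.length).map (fun i =>
      (List.range (pvWd matrix)).map (fun j => pvGC m i j)) := by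
  obtain ⟨hlen, hrow⟩ := hm
  refine List.ext_getElem (by simp [hlen]) ?_
  intro i hi1 hi2
  simp only [List.getElem_map, List.getElem_range]
  refine List.ext_getElem (by simp [hrow i hi1]) ?_
  intro j hj1 hj2
  simp only [List.getElem_map, List.getElem_range]
  unfold pvGC
  rw [List.getElem?_eq_getElem hi1, Option.getD_some,
    List.getElem?_eq_getElem hj1, Option.getD_some]

-- ========== level-set abstraction shared by both ports ==========

def pvNbrs (x : Int × Int) : List (Int × Int) :=
  [(x.1 + 1, x.2), (x.1 - 1, x.2), (x.1, x.2 + 1), (x.1, x.2 - 1)]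

-- the sequential fresh-neighbour extension of one cell's neighbour list
def pvExtL (matrix : List (List Int)) : List (Int × Int) → PySem.Set (Int × Int) → List (Int × Int)
  | [], _ => []
  | n :: t, s =>
    if 0 ≤ n.1 ∧ n.1 < (matrix.length : Int) ∧ 0 ≤ n.2 ∧
        n.2 < ((PySem.List.pyGetD matrix 0 []).length : Int) ∧
        pvA_at matrix n.1 n.2 ≠ 1 ∧ ¬ n ∈ s
    then n :: pvExtL matrix t (s ++ [n]) else pvExtL matrix t s

-- the extension of a whole frontier
def pvExtF (matrix : List (List Int)) : List (Int × Int) → PySem.Set (Int × Int) → List (Int × Int)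
  | [], _ => []
  | c :: t, s => pvExtL matrix (pvNbrs c) s ++ pvExtF matrix t (s ++ pvExtL matrix (pvNbrs c) s)

-- frontier / seen after k levels
def pvFrontN (matrix : List (List Int)) : Nat → List (Int × Int) → PySem.Set (Int × Int) → List (Int × Int)
  | 0, front, _ => front
  | k + 1, front, s => pvFrontN matrix k (pvExtF matrix front s) (s ++ pvExtF matrix front s)

def pvSeenN (matrix : List (List Int)) : Nat → List (Int × Int) → PySem.Set (Int × Int) → PySem.Set (Int × Int)
  | 0, _, s => s
  | k + 1, front, s => pvSeenN matrix k (pvExtF matrix front s) (s ++ pvExtF matrix front s)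

-- the level-by-level dequeue sequence
def pvLvlTrace (matrix : List (List Int)) : Nat → List (Int × Int) → PySem.Set (Int × Int) → Int → List (Int × Int × Int)
  | 0, _, _, _ => []
  | n + 1, front, s, d =>
    if front = [] then [] else
      front.map (fun c => (c.1, c.2, d)) ++
        pvLvlTrace matrix n (pvExtF matrix front s) (s ++ pvExtF matrix front s) (d + 1)

-- the level at which a cell is discovered (B's table entry, abstractly)
def pvFindN (matrix : List (List Int)) : Nat → List (Int × Int) → PySem.Set (Int × Int) → (Int × Int) → Option Int
  | 0, _, _, _ => none
  | n + 1, front, s, x =>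
    if x ∈ front then some 0
    else (pvFindN matrix n (pvExtF matrix front s) (s ++ pvExtF matrix front s) x).map (fun j => j + 1)

-- ===== basic facts =====

theorem pvTrace_nil (matrix : List (List Int)) (f : Nat) (s : PySem.Set (Int × Int)) :
    pvTrace matrix f [] s = [] := by cases f <;> simp [pvTrace]

theorem pvExtF_nil (matrix : List (List Int)) (s : PySem.Set (Int × Int)) :
    pvExtF matrix [] s = [] := rfl

theorem pvFoldl_extL (matrix : List (List Int)) (d : Int) :
    ∀ (nbs : List (Int × Int)) (q : List (Int × Int × Int)) (s : PySem.Set (Int × Int)),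
      (nbs.foldl (fun qs nb =>
        if 0 ≤ nb.1 ∧ nb.1 < (matrix.length : Int) ∧ 0 ≤ nb.2 ∧
            nb.2 < ((PySem.List.pyGetD matrix 0 []).length : Int) ∧
            pvA_at matrix nb.1 nb.2 ≠ 1 ∧ ¬ nb ∈ qs.2 then
          (qs.1 ++ [(nb.1, nb.2, d + 1)], PySem.Set.add qs.2 nb)
        else qs) (q, s))
      = (q ++ (pvExtL matrix nbs s).map (fun n => (n.1, n.2, d + 1)), s ++ pvExtL matrix nbs s) := by
  intro nbs
  induction nbs with
  | nil => intro q s; simp [pvExtL]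
  | cons n t ih =>
    intro q s
    by_cases h : 0 ≤ n.1 ∧ n.1 < (matrix.length : Int) ∧ 0 ≤ n.2 ∧
        n.2 < ((PySem.List.pyGetD matrix 0 []).length : Int) ∧
        pvA_at matrix n.1 n.2 ≠ 1 ∧ ¬ n ∈ s
    · have hadd : PySem.Set.add s n = s ++ [n] := by
        simp [PySem.Set.add, PySem.Set.contains, h.2.2.2.2.2]
      simp only [List.foldl_cons, if_pos h, hadd, pvExtL]
      rw [ih]
      simp [List.append_assoc]
    · simp only [List.foldl_cons, if_neg h, pvExtL]
      rw [ih]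

theorem pvA_nbr_ext (matrix : List (List Int)) (cr cc d : Int)
    (q : List (Int × Int × Int)) (s : PySem.Set (Int × Int)) :
    pvA_nbr matrix cr cc d (q, s)
      = (q ++ (pvExtL matrix (pvNbrs (cr, cc)) s).map (fun n => (n.1, n.2, d + 1)),
         s ++ pvExtL matrix (pvNbrs (cr, cc)) s) := by
  have := pvFoldl_extL matrix d [(cr + 1, cc), (cr - 1, cc), (cr, cc + 1), (cr, cc - 1)] q s
  simpa only [pvA_nbr, pvNbrs] using this

theorem pvMem_extL (matrix : List (List Int)) :
    ∀ (nbs : List (Int × Int)) (s : PySem.Set (Int × Int)) (x : Int × Int),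
      x ∈ pvExtL matrix nbs s ↔ x ∈ nbs ∧ pvOpen matrix x ∧ x ∉ s := by
  intro nbs
  induction nbs with
  | nil => intro s x; simp [pvExtL]
  | cons n t ih =>
    intro s x
    by_cases h : 0 ≤ n.1 ∧ n.1 < (matrix.length : Int) ∧ 0 ≤ n.2 ∧
        n.2 < ((PySem.List.pyGetD matrix 0 []).length : Int) ∧
        pvA_at matrix n.1 n.2 ≠ 1 ∧ ¬ n ∈ s
    · simp only [pvExtL, if_pos h]
      constructor
      · intro hx
        rcases List.mem_cons.1 hx with rfl | hx
        · exact ⟨by simp, ⟨⟨h.1, h.2.1, h.2.2.1, h.2.2.2.1⟩, h.2.2.2.2.1⟩, h.2.2.2.2.2⟩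
        · obtain ⟨hm, ho, hs⟩ := (ih (s ++ [n]) x).1 hx
          exact ⟨List.mem_cons_of_mem _ hm, ho, fun hc => hs (by simp [hc])⟩
      · rintro ⟨hm, ho, hs⟩
        rcases List.mem_cons.1 hm with rfl | hm
        · exact List.mem_cons_self
        · by_cases hxn : x = n
          · subst hxn; exact List.mem_cons_self
          · refine List.mem_cons_of_mem _ ((ih (s ++ [n]) x).2 ⟨hm, ho, ?_⟩)
            intro hc
            rcases List.mem_append.1 hc with hc | hc
            · exact hs hc
            · exact hxn (List.mem_singleton.1 hc)
    · simp only [pvExtL, if_neg h]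
      constructor
      · intro hx
        obtain ⟨hm, ho, hs⟩ := (ih s x).1 hx
        exact ⟨List.mem_cons_of_mem _ hm, ho, hs⟩
      · rintro ⟨hm, ho, hs⟩
        rcases List.mem_cons.1 hm with rfl | hm
        · exact absurd ⟨ho.1.1, ho.1.2.1, ho.1.2.2.1, ho.1.2.2.2, ho.2, hs⟩ h
        · exact (ih s x).2 ⟨hm, ho, hs⟩

theorem pvExtL_nodup (matrix : List (List Int)) :
    ∀ (nbs : List (Int × Int)) (s : PySem.Set (Int × Int)), (pvExtL matrix nbs s).Nodup := by
  intro nbs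
  induction nbs with
  | nil => intro s; simp [pvExtL]
  | cons n t ih =>
    intro s
    by_cases h : 0 ≤ n.1 ∧ n.1 < (matrix.length : Int) ∧ 0 ≤ n.2 ∧
        n.2 < ((PySem.List.pyGetD matrix 0 []).length : Int) ∧
        pvA_at matrix n.1 n.2 ≠ 1 ∧ ¬ n ∈ s
    · simp only [pvExtL, if_pos h]
      refine List.nodup_cons.2 ⟨fun hmem => ?_, ih _⟩
      have := ((pvMem_extL matrix t (s ++ [n]) n).1 hmem).2.2
      exact this (by simp)
    · simp only [pvExtL, if_neg h]
      exact ih _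

theorem pvMem_extF (matrix : List (List Int)) :
    ∀ (front : List (Int × Int)) (s : PySem.Set (Int × Int)) (x : Int × Int),
      x ∈ pvExtF matrix front s ↔ pvOpen matrix x ∧ x ∉ s ∧ ∃ c ∈ front, x ∈ pvNbrs c := by
  intro front
  induction front with
  | nil => intro s x; simp [pvExtF]
  | cons c t ih =>
    intro s x
    simp only [pvExtF, List.mem_append]
    constructor
    · intro hx
      rcases hx with hx | hx
      · obtain ⟨hm, ho, hs⟩ := (pvMem_extL matrix _ _ _).1 hx
        exact ⟨ho, hs, c, List.mem_cons_self, hm⟩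
      · obtain ⟨ho, hs, c', hc', hnb⟩ := (ih _ _).1 hx
        exact ⟨ho, fun hc => hs (List.mem_append.2 (Or.inl hc)), c', List.mem_cons_of_mem _ hc', hnb⟩
    · rintro ⟨ho, hs, c', hc', hnb⟩
      rcases List.mem_cons.1 hc' with rfl | hc'
      · exact Or.inl ((pvMem_extL matrix _ _ _).2 ⟨hnb, ho, hs⟩)
      · by_cases hxe : x ∈ pvExtL matrix (pvNbrs c) s
        · exact Or.inl hxe
        · refine Or.inr ((ih _ _).2 ⟨ho, ?_, c', hc', hnb⟩)
          intro hc
          rcases List.mem_append.1 hc with hc | hc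
          · exact hs hc
          · exact hxe hc

theorem pvExtF_nodup (matrix : List (List Int)) :
    ∀ (front : List (Int × Int)) (s : PySem.Set (Int × Int)), (pvExtF matrix front s).Nodup := by
  intro front
  induction front with
  | nil => intro s; simp [pvExtF]
  | cons c t ih =>
    intro s
    simp only [pvExtF]
    refine List.Nodup.append (pvExtL_nodup matrix _ _) (ih _) ?_
    intro x hx1 hx2
    have := ((pvMem_extF matrix t _ x).1 hx2).2.1
    exact this (List.mem_append.2 (Or.inr hx1))

-- ===== frontier telescopes =====

theorem pvFrontN_succ (matrix : List (List Int)) :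
    ∀ (k : Nat) (front : List (Int × Int)) (s : PySem.Set (Int × Int)),
      pvFrontN matrix (k + 1) front s
        = pvExtF matrix (pvFrontN matrix k front s) (pvSeenN matrix k front s) := by
  intro k
  induction k with
  | zero => intro front s; rfl
  | succ k ih =>
    intro front s
    show pvFrontN matrix (k + 1) (pvExtF matrix front s) (s ++ pvExtF matrix front s) = _
    rw [ih]
    rfl

theorem pvSeenN_succ (matrix : List (List Int)) :
    ∀ (k : Nat) (front : List (Int × Int)) (s : PySem.Set (Int × Int)),
      pvSeenN matrix (k + 1) front s
        = pvSeenN matrix k front s ++ pvExtF matrix (pvFrontN matrix k front s) (pvSeenN matrix k front s) := by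
  intro k
  induction k with
  | zero => intro front s; rfl
  | succ k ih =>
    intro front s
    show pvSeenN matrix (k + 1) (pvExtF matrix front s) (s ++ pvExtF matrix front s) = _
    rw [ih]
    rfl

theorem pvFrontN_nilF (matrix : List (List Int)) :
    ∀ (k : Nat) (s : PySem.Set (Int × Int)), pvFrontN matrix k [] s = [] := by
  intro k
  induction k with
  | zero => intro s; rfl
  | succ k ih =>
    intro s
    show pvFrontN matrix k (pvExtF matrix [] s) (s ++ pvExtF matrix [] s) = []
    rw [pvExtF_nil, List.append_nil]
    exact ih s

theorem pvSeenN_nilF (matrix : List (List Int)) :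
    ∀ (k : Nat) (s : PySem.Set (Int × Int)), pvSeenN matrix k [] s = s := by
  intro k
  induction k with
  | zero => intro s; rfl
  | succ k ih =>
    intro s
    show pvSeenN matrix k (pvExtF matrix [] s) (s ++ pvExtF matrix [] s) = s
    rw [pvExtF_nil, List.append_nil]
    exact ih s

theorem pvFrontN_empty_mono (matrix : List (List Int)) (front : List (Int × Int))
    (s : PySem.Set (Int × Int)) (m m' : Nat) (h : pvFrontN matrix m front s = [])
    (hmm : m ≤ m') : pvFrontN matrix m' front s = [] := by
  obtain ⟨j, rfl⟩ := Nat.exists_eq_add_of_le hmm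
  induction j with
  | zero => simpa using h
  | succ j ih =>
    have e : m + (j + 1) = (m + j) + 1 := rfl
    rw [e, pvFrontN_succ, ih (by omega), pvExtF_nil]

theorem pvFrontN_subset_seenN (matrix : List (List Int)) :
    ∀ (k : Nat) (front : List (Int × Int)) (s : PySem.Set (Int × Int)),
      front ⊆ s → pvFrontN matrix k front s ⊆ pvSeenN matrix k front s := by
  intro k
  induction k with
  | zero => intro front s hfs; exact hfs
  | succ k ih =>
    intro front s hfs
    show pvFrontN matrix k (pvExtF matrix front s) (s ++ pvExtF matrix front s) ⊆
      pvSeenN matrix k (pvExtF matrix front s) (s ++ pvExtF matrix front s)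
    exact ih _ _ (fun x hx => List.mem_append.2 (Or.inr hx))

theorem pvSeenN_mono (matrix : List (List Int)) (front : List (Int × Int))
    (s : PySem.Set (Int × Int)) (j k : Nat) (h : j ≤ k) :
    pvSeenN matrix j front s ⊆ pvSeenN matrix k front s := by
  obtain ⟨i, rfl⟩ := Nat.exists_eq_add_of_le h
  clear h
  induction i with
  | zero => exact fun x hx => hx
  | succ i ih =>
    have e : j + (i + 1) = (j + i) + 1 := rfl
    rw [e, pvSeenN_succ]
    exact fun x hx => List.mem_append.2 (Or.inl (ih hx))

theorem pvMem_frontN_succ_not_seen (matrix : List (List Int)) (k : Nat)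
    (front : List (Int × Int)) (s : PySem.Set (Int × Int)) (x : Int × Int)
    (hx : x ∈ pvFrontN matrix (k + 1) front s) : x ∉ pvSeenN matrix k front s := by
  rw [pvFrontN_succ] at hx
  exact ((pvMem_extF matrix _ _ _).1 hx).2.1

theorem pvMem_seenN_iff (matrix : List (List Int)) :
    ∀ (k : Nat) (front : List (Int × Int)) (s : PySem.Set (Int × Int)), front ⊆ s →
      ∀ x, (x ∈ pvSeenN matrix k front s ↔ x ∈ s ∨ ∃ j ≤ k, x ∈ pvFrontN matrix j front s) := by
  intro k
  induction k with
  | zero =>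
    intro front s hfs x
    constructor
    · exact fun hx => Or.inl hx
    · rintro (hx | ⟨j, hj, hx⟩)
      · exact hx
      · interval_cases j
        exact hfs hx
  | succ k ih =>
    intro front s hfs x
    rw [pvSeenN_succ, ← pvFrontN_succ]
    constructor
    · intro hx
      rcases List.mem_append.1 hx with hx | hx
      · rcases (ih front s hfs x).1 hx with hx | ⟨j, hj, hx⟩
        · exact Or.inl hx
        · exact Or.inr ⟨j, by omega, hx⟩
      · exact Or.inr ⟨k + 1, le_refl _, hx⟩
    · rintro (hx | ⟨j, hj, hx⟩)
      · exact List.mem_append.2 (Or.inl ((ih front s hfs x).2 (Or.inl hx)))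
      · by_cases hjk : j ≤ k
        · exact List.mem_append.2 (Or.inl ((ih front s hfs x).2 (Or.inr ⟨j, hjk, hx⟩)))
        · have : j = k + 1 := by omega
          subst this
          exact List.mem_append.2 (Or.inr hx)

theorem pvFrontN_disjoint (matrix : List (List Int)) (front : List (Int × Int))
    (s : PySem.Set (Int × Int)) (hfs : front ⊆ s) (a b : Nat) (x : Int × Int)
    (ha : x ∈ pvFrontN matrix a front s) (hb : x ∈ pvFrontN matrix b front s) : a = b := by
  have aux : ∀ a b : Nat, a < b → x ∈ pvFrontN matrix a front s →
      x ∈ pvFrontN matrix b front s → False := by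
    intro a b hab hxa hxb
    have hb1 : b = (b - 1) + 1 := by omega
    rw [hb1] at hxb
    have hns := pvMem_frontN_succ_not_seen matrix (b - 1) front s x hxb
    have : x ∈ pvSeenN matrix (b - 1) front s :=
      pvSeenN_mono matrix front s a (b - 1) (by omega)
        (pvFrontN_subset_seenN matrix a front s hfs hxa)
    exact hns this
  rcases Nat.lt_trichotomy a b with h | h | h
  · exact absurd (aux a b h ha hb) (fun f => f)
  · exact h
  · exact absurd (aux b a h hb ha) (fun f => f)

theorem pvFrontN_open (matrix : List (List Int)) :
    ∀ (k : Nat) (front : List (Int × Int)) (s : PySem.Set (Int × Int)),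
      (∀ x ∈ front, pvOpen matrix x) → ∀ x ∈ pvFrontN matrix k front s, pvOpen matrix x := by
  intro k
  induction k with
  | zero => intro front s h; exact h
  | succ k ih =>
    intro front s h
    show ∀ x ∈ pvFrontN matrix k (pvExtF matrix front s) (s ++ pvExtF matrix front s), _
    exact ih _ _ (fun x hx => ((pvMem_extF matrix front s x).1 hx).1)

theorem pvSeenN_inv (matrix : List (List Int)) :
    ∀ (k : Nat) (front : List (Int × Int)) (s : PySem.Set (Int × Int)),
      s.Nodup → (∀ x ∈ s, pvInR matrix x) →
      (pvSeenN matrix k front s).Nodup ∧ ∀ x ∈ pvSeenN matrix k front s, pvInR matrix x := by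
  intro k
  induction k with
  | zero => intro front s h1 h2; exact ⟨h1, h2⟩
  | succ k ih =>
    intro front s h1 h2
    show (pvSeenN matrix k (pvExtF matrix front s) (s ++ pvExtF matrix front s)).Nodup ∧ _
    refine ih _ _ ?_ ?_
    · refine List.Nodup.append h1 (pvExtF_nodup matrix front s) ?_
      intro x hx1 hx2
      exact ((pvMem_extF matrix front s x).1 hx2).2.1 hx1
    · intro x hx
      rcases List.mem_append.1 hx with hx | hx
      · exact h2 x hx
      · exact ((pvMem_extF matrix front s x).1 hx).1.1

-- a nodup list of in-range cells has at most rows*cols elements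
theorem pvInR_length_le (matrix : List (List Int)) (l : List (Int × Int))
    (hnd : l.Nodup) (hin : ∀ x ∈ l, pvInR matrix x) :
    l.length ≤ matrix.length * pvWd matrix := by
  rcases l with _ | ⟨y, l'⟩
  · simp
  set l := y :: l' with hl
  have hy := hin y (by simp [hl])
  simp only [pvInR] at hy
  have hW : 0 < pvWd matrix := by omega
  set f : Int × Int → Nat := fun x => pvWd matrix * x.1.toNat + x.2.toNat with hf
  have hinj : ∀ x ∈ l, ∀ z ∈ l, f x = f z → x = z := by
    intro x hx z hz hfe
    have hx' := hin x hx
    have hz' := hin z hz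
    simp only [pvInR] at hx' hz'
    have hx2 : x.2.toNat < pvWd matrix := by omega
    have hz2 : z.2.toNat < pvWd matrix := by omega
    simp only [hf] at hfe
    have d1 := congrArg (fun n => n / pvWd matrix) hfe
    simp only at d1
    rw [Nat.mul_add_div hW, Nat.mul_add_div hW, Nat.div_eq_of_lt hx2, Nat.div_eq_of_lt hz2] at d1
    have m1 := congrArg (fun n => n % pvWd matrix) hfe
    simp only at m1
    rw [Nat.mul_add_mod, Nat.mul_add_mod, Nat.mod_eq_of_lt hx2, Nat.mod_eq_of_lt hz2] at m1
    have : x.1 = z.1 ∧ x.2 = z.2 := by omega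
    exact Prod.ext this.1 this.2
  have hnd2 : (l.map f).Nodup := List.Nodup.map_on hinj hnd
  have hsub : (l.map f).toFinset ⊆ Finset.range (matrix.length * pvWd matrix) := by
    intro a ha
    rw [List.mem_toFinset] at ha
    obtain ⟨x, hx, rfl⟩ := List.mem_map.1 ha
    have hx' := hin x hx
    simp only [pvInR] at hx'
    rw [Finset.mem_range]
    have hx1 : x.1.toNat < matrix.length := by omega
    have h5 : pvWd matrix * x.1.toNat + x.2.toNat < pvWd matrix * (x.1.toNat + 1) := by
      rw [Nat.mul_succ]
      omega
    have h6 : pvWd matrix * (x.1.toNat + 1) ≤ pvWd matrix * matrix.length :=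
      Nat.mul_le_mul_left _ (by omega)
    have : f x < pvWd matrix * matrix.length := lt_of_lt_of_le h5 h6
    simpa [Nat.mul_comm] using this
  have := Finset.card_le_card hsub
  rw [Finset.card_range, List.toFinset_card_of_nodup hnd2] at this
  simpa using this

theorem pvGrowth (matrix : List (List Int)) :
    ∀ (K : Nat) (front : List (Int × Int)) (s : PySem.Set (Int × Int)),
      pvFrontN matrix K front s ≠ [] → s.length + K ≤ (pvSeenN matrix K front s).length := by
  intro K
  induction K with
  | zero => intro front s _; show s.length + 0 ≤ s.length; omega
  | succ K ih =>
    intro front s h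
    have hdef : pvFrontN matrix (K + 1) front s
        = pvFrontN matrix K (pvExtF matrix front s) (s ++ pvExtF matrix front s) := rfl
    rw [hdef] at h
    have hext : pvExtF matrix front s ≠ [] := by
      intro hc
      rw [hc] at h
      rw [List.append_nil] at h
      exact h (pvFrontN_nilF matrix K s)
    have hIH := ih (pvExtF matrix front s) (s ++ pvExtF matrix front s) h
    have hlen : 1 ≤ (pvExtF matrix front s).length := by
      cases hx : pvExtF matrix front s
      · exact absurd hx hext
      · simp
    have hdef2 : pvSeenN matrix (K + 1) front s
        = pvSeenN matrix K (pvExtF matrix front s) (s ++ pvExtF matrix front s) := rfl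
    rw [hdef2]
    simp only [List.length_append] at hIH
    omega

theorem pvFrontN_M_empty (matrix : List (List Int)) (p : Int × Int) (hp : pvInR matrix p) :
    pvFrontN matrix (matrix.length * pvWd matrix) [p] [p] = [] := by
  by_contra h
  have hg := pvGrowth matrix (matrix.length * pvWd matrix) [p] [p] h
  obtain ⟨hnd, hin⟩ := pvSeenN_inv matrix (matrix.length * pvWd matrix) [p] [p]
    (by simp) (by intro x hx; rcases List.mem_singleton.1 hx with rfl; exact hp)
  have := pvInR_length_le matrix _ hnd hin
  simp only [List.length_singleton] at hg
  omega

-- ===== the A-side trace is the level trace =====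

theorem pvTrace_level (matrix : List (List Int)) (d : Int) :
    ∀ (front : List (Int × Int)) (f : Nat) (acc : List (Int × Int)) (s : PySem.Set (Int × Int)),
      pvTrace matrix (front.length + f)
          (front.map (fun c => (c.1, c.2, d)) ++ acc.map (fun c => (c.1, c.2, d + 1))) s
        = front.map (fun c => (c.1, c.2, d)) ++
          pvTrace matrix f ((acc ++ pvExtF matrix front s).map (fun c => (c.1, c.2, d + 1)))
            (s ++ pvExtF matrix front s) := by
  intro front
  induction front with
  | nil =>
    intro f acc s
    simp [pvExtF]
  | cons c t ih =>
    intro f acc s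
    have hfuel : (c :: t).length + f = (t.length + f) + 1 := by simp; omega
    rw [hfuel]
    have hq : (c :: t).map (fun c => (c.1, c.2, d)) ++ acc.map (fun c => (c.1, c.2, d + 1))
        = (c.1, c.2, d) :: (t.map (fun c => (c.1, c.2, d)) ++ acc.map (fun c => (c.1, c.2, d + 1))) := by
      simp
    rw [hq]
    show (c.1, c.2, d) :: pvTrace matrix (t.length + f) (pvA_nbr matrix c.1 c.2 d _).1 (pvA_nbr matrix c.1 c.2 d _).2 = _
    rw [pvA_nbr_ext]
    have hc : (c.1, c.2) = c := rfl
    rw [hc]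
    have hqq : t.map (fun c => (c.1, c.2, d)) ++ acc.map (fun c => (c.1, c.2, d + 1))
        ++ (pvExtL matrix (pvNbrs c) s).map (fun n => (n.1, n.2, d + 1))
        = t.map (fun c => (c.1, c.2, d)) ++ (acc ++ pvExtL matrix (pvNbrs c) s).map (fun c => (c.1, c.2, d + 1)) := by
      simp [List.append_assoc]
    rw [hqq, ih f (acc ++ pvExtL matrix (pvNbrs c) s) (s ++ pvExtL matrix (pvNbrs c) s)]
    simp only [pvExtF, List.map_cons, List.cons_append, List.append_assoc]

theorem pvTrace_eq_lvl (matrix : List (List Int)) :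
    ∀ (n : Nat) (front : List (Int × Int)) (s : PySem.Set (Int × Int)) (d : Int) (f : Nat),
      pvFrontN matrix n front s = [] → (pvLvlTrace matrix n front s d).length ≤ f →
      pvTrace matrix f (front.map (fun c => (c.1, c.2, d))) s = pvLvlTrace matrix n front s d := by
  intro n
  induction n with
  | zero =>
    intro front s d f h _
    have : front = [] := h
    subst this
    simp [pvTrace_nil, pvLvlTrace]
  | succ n ih =>
    intro front s d f h hlen
    by_cases hf : front = []
    · subst hf
      simp [pvTrace_nil, pvLvlTrace]
    · have hlvl : pvLvlTrace matrix (n + 1) front s d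
          = front.map (fun c => (c.1, c.2, d)) ++
            pvLvlTrace matrix n (pvExtF matrix front s) (s ++ pvExtF matrix front s) (d + 1) := by
        simp [pvLvlTrace, hf]
      rw [hlvl] at hlen ⊢
      simp only [List.length_append, List.length_map] at hlen
      have hsplit : f = front.length + (f - front.length) := by omega
      rw [hsplit]
      have hlv := pvTrace_level matrix d front (f - front.length) [] s
      simp only [List.map_nil, List.append_nil, List.nil_append] at hlv
      rw [hlv]
      congr 1
      exact ih (pvExtF matrix front s) (s ++ pvExtF matrix front s) (d + 1)
        (f - front.length) h (by omega)

theorem pvLvlTrace_len (matrix : List (List Int)) :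
    ∀ (n : Nat) (front : List (Int × Int)) (s : PySem.Set (Int × Int)) (d : Int),
      pvFrontN matrix n front s = [] →
      (pvLvlTrace matrix n front s d).length + s.length
        = front.length + (pvSeenN matrix n front s).length := by
  intro n
  induction n with
  | zero =>
    intro front s d h
    have : front = [] := h
    subst this
    simp [pvLvlTrace, pvSeenN]
  | succ n ih =>
    intro front s d h
    by_cases hf : front = []
    · subst hf
      rw [pvSeenN_nilF]
      simp [pvLvlTrace]
    · have hlvl : pvLvlTrace matrix (n + 1) front s d
          = front.map (fun c => (c.1, c.2, d)) ++
            pvLvlTrace matrix n (pvExtF matrix front s) (s ++ pvExtF matrix front s) (d + 1) := by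
        simp [pvLvlTrace, hf]
      rw [hlvl]
      have hih := ih (pvExtF matrix front s) (s ++ pvExtF matrix front s) (d + 1) h
      have hseen : pvSeenN matrix (n + 1) front s
          = pvSeenN matrix n (pvExtF matrix front s) (s ++ pvExtF matrix front s) := rfl
      rw [hseen]
      simp only [List.length_append, List.length_map] at hih ⊢
      omega

theorem pvMem_lvlTrace (matrix : List (List Int)) :
    ∀ (n : Nat) (front : List (Int × Int)) (s : PySem.Set (Int × Int)) (d : Int)
      (x : Int × Int) (v : Int),
      ((x.1, x.2, v) ∈ pvLvlTrace matrix n front s d ↔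
        ∃ k < n, x ∈ pvFrontN matrix k front s ∧ v = d + k) := by
  intro n
  induction n with
  | zero =>
    intro front s d x v
    simp [pvLvlTrace]
  | succ n ih =>
    intro front s d x v
    by_cases hf : front = []
    · subst hf
      constructor
      · intro hx; simp [pvLvlTrace] at hx
      · rintro ⟨k, _, hx, _⟩
        rw [pvFrontN_nilF] at hx
        cases hx
    · have hlvl : pvLvlTrace matrix (n + 1) front s d
          = front.map (fun c => (c.1, c.2, d)) ++
            pvLvlTrace matrix n (pvExtF matrix front s) (s ++ pvExtF matrix front s) (d + 1) := by
        simp [pvLvlTrace, hf]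
      rw [hlvl]
      rw [List.mem_append]
      constructor
      · intro hx
        rcases hx with hx | hx
        · obtain ⟨c, hc, he⟩ := List.mem_map.1 hx
          have h1 := congrArg (fun t : Int × Int × Int => t.1) he
          have h2 := congrArg (fun t : Int × Int × Int => t.2.1) he
          have h3 := congrArg (fun t : Int × Int × Int => t.2.2) he
          simp only at h1 h2 h3
          refine ⟨0, by omega, ?_, by omega⟩
          have : c = x := Prod.ext h1 h2
          rw [← this]; exact hc
        · obtain ⟨k, hk, hx', hv⟩ := (ih _ _ _ x v).1 hx
          exact ⟨k + 1, by omega, hx', by omega⟩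
      · rintro ⟨k, hk, hx, hv⟩
        cases k with
        | zero =>
          refine Or.inl ?_
          have : v = d := by omega
          subst this
          exact List.mem_map.2 ⟨x, hx, rfl⟩
        | succ k =>
          refine Or.inr ((ih _ _ _ x v).2 ⟨k, by omega, hx, by omega⟩)

-- the per-person trace as a level trace
theorem pvTraceP_lvl (matrix : List (List Int)) (p : Int × Int) (hp : pvInR matrix p) :
    pvTraceP matrix p = pvLvlTrace matrix (matrix.length * pvWd matrix) [p] [p] 0 := by
  have hof : PySem.Set.ofList [p] = [p] := by
    simp [PySem.Set.ofList, PySem.Set.add, PySem.Set.contains]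
  have hq : [(p.1, p.2, (0 : Int))] = [p].map (fun c => (c.1, c.2, (0 : Int))) := by simp
  have hM := pvFrontN_M_empty matrix p hp
  have hlen := pvLvlTrace_len matrix (matrix.length * pvWd matrix) [p] [p] 0 hM
  obtain ⟨hnd, hin⟩ := pvSeenN_inv matrix (matrix.length * pvWd matrix) [p] [p]
    (by simp) (by intro x hx; rcases List.mem_singleton.1 hx with rfl; exact hp)
  have hb := pvInR_length_le matrix _ hnd hin
  unfold pvTraceP pvA_fuel
  rw [hof, hq]
  exact pvTrace_eq_lvl matrix (matrix.length * pvWd matrix) [p] [p] 0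
    (matrix.length * (PySem.List.pyGetD matrix 0 []).length + 1) hM
    (by
      simp only [List.length_singleton] at hlen
      have hw : (PySem.List.pyGetD matrix 0 []).length = pvWd matrix := rfl
      rw [hw]
      omega)

-- ===== pvFindN facts =====

theorem pvFindN_nilF (matrix : List (List Int)) :
    ∀ (n : Nat) (s : PySem.Set (Int × Int)) (x : Int × Int), pvFindN matrix n [] s x = none := by
  intro n
  induction n with
  | zero => intro s x; rfl
  | succ n ih =>
    intro s x
    show (if x ∈ ([] : List (Int × Int)) then some 0 else _) = none
    rw [if_neg (by simp)]
    rw [pvExtF_nil, List.append_nil, ih s x]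
    rfl

theorem pvFindN_of_front (matrix : List (List Int)) :
    ∀ (k n : Nat) (front : List (Int × Int)) (s : PySem.Set (Int × Int)) (x : Int × Int),
      front ⊆ s → x ∈ pvFrontN matrix k front s → k < n →
      pvFindN matrix n front s x = some (k : Int) := by
  intro k
  induction k with
  | zero =>
    intro n front s x _ hx hn
    cases n with
    | zero => omega
    | succ n =>
      have hx' : x ∈ front := hx
      show (if x ∈ front then some (0 : Int) else _) = _
      rw [if_pos hx']
      simp
  | succ k ih =>
    intro n front s x hfs hx hn
    cases n with
    | zero => omega
    | succ n =>
      have hnf : x ∉ front := by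
        intro hc
        have h1 := pvMem_frontN_succ_not_seen matrix k front s x hx
        have h2 : x ∈ pvSeenN matrix k front s :=
          pvSeenN_mono matrix front s 0 k (by omega) (hfs hc)
        exact h1 h2
      show (if x ∈ front then some (0 : Int) else _) = _
      rw [if_neg hnf]
      have := ih n (pvExtF matrix front s) (s ++ pvExtF matrix front s) x
        (fun y hy => List.mem_append.2 (Or.inr hy)) hx (by omega)
      rw [this]
      simp only [Option.map_some, Option.some.injEq]
      push_cast
      ring

theorem pvFindN_some (matrix : List (List Int)) :
    ∀ (n : Nat) (front : List (Int × Int)) (s : PySem.Set (Int × Int)) (x : Int × Int) (j : Int),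
      pvFindN matrix n front s x = some j →
      ∃ k : Nat, j = (k : Int) ∧ k < n ∧ x ∈ pvFrontN matrix k front s := by
  intro n
  induction n with
  | zero => intro front s x j h; cases h
  | succ n ih =>
    intro front s x j h
    by_cases hx : x ∈ front
    · have he : pvFindN matrix (n + 1) front s x = some 0 := by
        show (if x ∈ front then some (0 : Int) else _) = some 0
        rw [if_pos hx]
      rw [he] at h
      simp only [Option.some.injEq] at h
      exact ⟨0, by omega, by omega, hx⟩
    · rw [show pvFindN matrix (n + 1) front s x = (if x ∈ front then some (0 : Int) else (pvFindN matrix n (pvExtF matrix front s) (s ++ pvExtF matrix front s) x).map (fun j => j + 1)) from rfl] at h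
      rw [if_neg hx] at h
      cases hrec : pvFindN matrix n (pvExtF matrix front s) (s ++ pvExtF matrix front s) x with
      | none => rw [hrec] at h; cases h
      | some j' =>
        rw [hrec] at h
        simp only [Option.map_some, Option.some.injEq] at h
        obtain ⟨k, hk1, hk2, hk3⟩ := ih _ _ _ _ hrec
        exact ⟨k + 1, by push_cast; omega, by omega, hk3⟩

theorem pvFindN_none (matrix : List (List Int)) :
    ∀ (n : Nat) (front : List (Int × Int)) (s : PySem.Set (Int × Int)) (x : Int × Int),
      (∀ k < n, x ∉ pvFrontN matrix k front s) → pvFindN matrix n front s x = none := by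
  intro n
  induction n with
  | zero => intro front s x _; rfl
  | succ n ih =>
    intro front s x h
    have h0 : x ∉ front := h 0 (by omega)
    show (if x ∈ front then some (0 : Int) else _) = none
    rw [if_neg h0]
    rw [ih (pvExtF matrix front s) (s ++ pvExtF matrix front s) x
      (fun k hk => h (k + 1) (by omega))]
    rfl

theorem pvFindN_stable (matrix : List (List Int)) :
    ∀ (m n : Nat) (front : List (Int × Int)) (s : PySem.Set (Int × Int)) (x : Int × Int),
      pvFrontN matrix m front s = [] → m ≤ n →
      pvFindN matrix n front s x = pvFindN matrix m front s x := by
  intro m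
  induction m with
  | zero =>
    intro n front s x h _
    have : front = [] := h
    subst this
    rw [pvFindN_nilF, pvFindN_nilF]
  | succ m ih =>
    intro n front s x h hmn
    cases n with
    | zero => omega
    | succ n =>
      show (if x ∈ front then some (0 : Int) else _) = (if x ∈ front then some (0 : Int) else _)
      by_cases hx : x ∈ front
      · rw [if_pos hx, if_pos hx]
      · rw [if_neg hx, if_neg hx]
        rw [ih n (pvExtF matrix front s) (s ++ pvExtF matrix front s) x h (by omega)]

-- ===== geometry =====

theorem pvNbrs_symm (x y : Int × Int) : y ∈ pvNbrs x ↔ x ∈ pvNbrs y := by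
  simp only [pvNbrs, List.mem_cons, List.not_mem_nil, or_false]
  constructor <;> rintro (rfl | rfl | rfl | rfl) <;> simp [Prod.ext_iff]

theorem pvStep_seen (matrix : List (List Int)) (v : Nat) (front : List (Int × Int))
    (s : PySem.Set (Int × Int)) (x c : Int × Int)
    (hx : pvOpen matrix x) (hc : c ∈ pvFrontN matrix v front s) (hnb : x ∈ pvNbrs c) :
    x ∈ pvSeenN matrix (v + 1) front s := by
  rw [pvSeenN_succ]
  by_cases hxs : x ∈ pvSeenN matrix v front s
  · exact List.mem_append.2 (Or.inl hxs)
  · refine List.mem_append.2 (Or.inr ?_)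
    exact (pvMem_extF matrix _ _ _).2 ⟨hx, hxs, c, hc, hnb⟩

-- ===== min-merge fold =====

def pvMerge (best : Option Int) (v : Int) : Option Int :=
  match best with
  | none => some v
  | some b => if v < b then some v else some b

theorem pvMergeF_eq {l : List Int} {b : Option Int} {m : Int}
    (hmem : b = some m ∨ m ∈ l) (hb : ∀ v, b = some v → m ≤ v) (hl : ∀ v ∈ l, m ≤ v) :
    l.foldl pvMerge b = some m := by
  induction l generalizing b with
  | nil =>
    rcases hmem with h | h
    · simpa using h
    · cases h
  | cons v t ih =>
    simp only [List.foldl_cons]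
    have hv : m ≤ v := hl v List.mem_cons_self
    refine ih ?_ ?_ (fun w hw => hl w (List.mem_cons_of_mem _ hw))
    · rcases hmem with h | h
      · subst h
        left
        simp only [pvMerge]
        rw [if_neg (by omega)]
      · rcases List.mem_cons.1 h with rfl | h
        · cases b with
          | none => exact Or.inl rfl
          | some b' =>
            have hb' : m ≤ b' := hb b' rfl
            left
            simp only [pvMerge]
            split
            · rfl
            · congr 1; omega
        · exact Or.inr h
    · intro w hw
      cases b with
      | none => simp only [pvMerge, Option.some.injEq] at hw; omega
      | some b' =>
        have hb' : m ≤ b' := hb b' rfl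
        simp only [pvMerge] at hw
        split at hw <;> simp only [Option.some.injEq] at hw <;> omega

-- the literal neighbour fold of pvB_cell is a pvMerge fold over the candidate list
theorem pvFoldl_cand (rows cols : Nat) (dist : List (List (Option Int))) :
    ∀ (l : List (Int × Int)) (best : Option Int),
      l.foldl (fun (best : Option Int) (nb : Int × Int) =>
        if 0 ≤ nb.1 ∧ nb.1 < (rows : Int) ∧ 0 ≤ nb.2 ∧ nb.2 < (cols : Int) then
          match (dist.getD nb.1.toNat []).getD nb.2.toNat none with
          | some v =>
            match best with
            | none => some (v + 1)
            | some b => if v + 1 < b then some (v + 1) else some b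
          | none => best
        else best) best
      = (l.filterMap (fun nb =>
          if 0 ≤ nb.1 ∧ nb.1 < (rows : Int) ∧ 0 ≤ nb.2 ∧ nb.2 < (cols : Int) then
            ((dist.getD nb.1.toNat []).getD nb.2.toNat none).map (fun v => v + 1)
          else none)).foldl pvMerge best := by
  intro l
  induction l with
  | nil => intro best; rfl
  | cons nb t ih =>
    intro best
    by_cases hg : 0 ≤ nb.1 ∧ nb.1 < (rows : Int) ∧ 0 ≤ nb.2 ∧ nb.2 < (cols : Int)
    · simp only [List.foldl_cons, List.filterMap_cons, if_pos hg]
      cases he : (dist.getD nb.1.toNat []).getD nb.2.toNat none with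
      | none =>
        simp only [Option.map_none]
        exact ih best
      | some v =>
        simp only [Option.map_some, List.foldl_cons]
        have hm : (match best with
            | none => some (v + 1)
            | some b => if v + 1 < b then some (v + 1) else some b) = pvMerge best (v + 1) := by
          cases best <;> rfl
        rw [hm]
        exact ih (pvMerge best (v + 1))
    · simp only [List.foldl_cons, List.filterMap_cons, if_neg hg]
      exact ih best

theorem pvFindN_one (matrix : List (List Int)) (p x : Int × Int) :
    pvFindN matrix 1 [p] [p] x = if x = p then some 0 else none := by
  show (if x ∈ [p] then some (0 : Int) else _) = _
  by_cases hx : x = p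
  · rw [if_pos (by simp [hx]), if_pos hx]
  · rw [if_neg (by simp [hx]), if_neg hx]
    rfl

-- ===== B's grids =====

def pvGrid (matrix : List (List Int)) (p : Int × Int) (k : Nat) : List (List (Option Int)) :=
  (List.range matrix.length).map (fun (r : Nat) =>
    (List.range (pvWd matrix)).map (fun (c : Nat) =>
      pvFindN matrix (k + 1) [p] [p] ((r : Int), (c : Int))))

theorem pvMapRange_getElem? {α : Type} (n : Nat) (f : Nat → α) (i : Nat) :
    ((List.range n).map f)[i]? = if i < n then some (f i) else none := by
  by_cases h : i < n
  · rw [List.getElem?_map, List.getElem?_eq_getElem (by simpa using h)]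
    simp [h]
  · rw [List.getElem?_map, List.getElem?_eq_none (by simpa using h)]
    simp [h]

theorem pvGrid_lookup (matrix : List (List Int)) (p : Int × Int) (k : Nat) (r c : Nat)
    (hr : r < matrix.length) (hc : c < pvWd matrix) :
    ((pvGrid matrix p k).getD r []).getD c none
      = pvFindN matrix (k + 1) [p] [p] ((r : Int), (c : Int)) := by
  unfold pvGrid
  simp only [List.getD_eq_getElem?_getD]
  rw [pvMapRange_getElem?, if_pos hr]
  simp only [Option.getD_some]
  rw [pvMapRange_getElem?, if_pos hc]
  simp

theorem pvInit_eq_grid (matrix : List (List Int)) (p : Int × Int) (hp : pvInR matrix p) :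
    (List.replicate matrix.length (List.replicate (pvWd matrix) (none : Option Int))).modify p.1.toNat
      (fun row => row.modify p.2.toNat (fun _ => some 0)) = pvGrid matrix p 0 := by
  refine List.ext_getElem? ?_
  intro i
  rw [List.getElem?_modify]
  by_cases hi : i < matrix.length
  · rw [show (List.replicate matrix.length (List.replicate (pvWd matrix) (none : Option Int)))[i]?
        = some (List.replicate (pvWd matrix) (none : Option Int)) by
      simp [hi]]
    rw [show (pvGrid matrix p 0)[i]? = some ((List.range (pvWd matrix)).map (fun (c : Nat) =>
        pvFindN matrix (0 + 1) [p] [p] ((i : Int), (c : Int)))) by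
      unfold pvGrid; rw [pvMapRange_getElem?, if_pos hi]]
    simp only [Nat.zero_add, Option.map_apply, Option.map_some, Option.some.injEq]
    refine List.ext_getElem? ?_
    intro j
    rw [pvMapRange_getElem?]
    by_cases hj : j < pvWd matrix
    · rw [if_pos hj, pvFindN_one]
      by_cases hpi : p.1.toNat = i
      · rw [if_pos hpi, List.getElem?_modify]
        rw [show (List.replicate (pvWd matrix) (none : Option Int))[j]? = some none by
          simp [hj]]
        simp only [Option.map_apply, Option.map_some, Option.some.injEq]
        by_cases hpj : p.2.toNat = j
        · rw [if_pos hpj, if_pos (by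
            simp only [pvInR] at hp
            refine (Prod.ext_iff.2 ⟨?_, ?_⟩).symm <;> simp <;> omega)]
        · rw [if_neg hpj, if_neg (by
            simp only [pvInR] at hp
            intro hcc
            rw [← hcc] at hpj
            simp at hpj)]
      · rw [if_neg hpi]
        rw [show (List.replicate (pvWd matrix) (none : Option Int))[j]? = some none by
          simp [hj]]
        simp only [Option.some.injEq]
        rw [if_neg (by
          simp only [pvInR] at hp
          intro hcc
          rw [← hcc] at hpi
          simp at hpi)]
    · rw [if_neg hj]
      by_cases hpi : p.1.toNat = i
      · rw [if_pos hpi, List.getElem?_modify]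
        rw [show (List.replicate (pvWd matrix) (none : Option Int))[j]? = none by
          simp; omega]
        rfl
      · rw [if_neg hpi]
        simp
        omega
  · rw [show (List.replicate matrix.length (List.replicate (pvWd matrix) (none : Option Int)))[i]?
        = none by simp; omega]
    rw [show (pvGrid matrix p 0)[i]? = none by
      unfold pvGrid; rw [pvMapRange_getElem?, if_neg hi]]
    rfl

theorem pvCell_find (matrix : List (List Int)) (p : Int × Int) (hp : pvOpen matrix p)
    (k : Nat) (r c : Nat) (hr : r < matrix.length) (hc : c < pvWd matrix) :
    pvB_cell matrix matrix.length (pvWd matrix) (pvGrid matrix p k) r c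
      = pvFindN matrix (k + 2) [p] [p] ((r : Int), (c : Int)) := by
  have hbase : ∀ y ∈ ([p] : List (Int × Int)), pvOpen matrix y := by
    intro y hy; rcases List.mem_singleton.1 hy with rfl; exact hp
  have hfs : ([p] : List (Int × Int)) ⊆ [p] := fun y hy => hy
  have hFopen : ∀ (k' : Nat) (y : Int × Int), y ∈ pvFrontN matrix k' [p] [p] → pvOpen matrix y :=
    fun k' => pvFrontN_open matrix k' [p] [p] hbase
  have hxin : pvInR matrix ((r : Int), (c : Int)) := by
    simp only [pvInR]
    exact ⟨by omega, by omega, by omega, by omega⟩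
  have hlook : ∀ nb : Int × Int, pvInR matrix nb →
      ((pvGrid matrix p k).getD nb.1.toNat []).getD nb.2.toNat none
        = pvFindN matrix (k + 1) [p] [p] nb := by
    intro nb hnb
    have hnb' := hnb
    simp only [pvInR] at hnb'
    have h1 : nb.1.toNat < matrix.length := by omega
    have h2 : nb.2.toNat < pvWd matrix := by omega
    rw [pvGrid_lookup matrix p k _ _ h1 h2]
    congr 1
    exact Prod.ext (Int.toNat_of_nonneg hnb'.1) (Int.toNat_of_nonneg hnb'.2.2.1)
  have hat : pvA_at matrix ((r : Int)) ((c : Int)) = (matrix.getD r []).getD c 0 := by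
    simp [pvA_at]
  have hbest := pvGrid_lookup matrix p k r c hr hc
  unfold pvB_cell
  by_cases hwall : pvA_at matrix ((r : Int)) ((c : Int)) = 1
  · have hgd : (matrix.getD r []).getD c 0 = 1 := by rw [← hat]; exact hwall
    rw [if_neg (fun hcon => hcon hgd)]
    have hnone : ∀ n, pvFindN matrix n [p] [p] ((r : Int), (c : Int)) = none := by
      intro n
      apply pvFindN_none
      intro k' _ hk'
      exact (hFopen k' _ hk').2 hwall
    rw [hbest, hnone, hnone]
  · have hx : pvOpen matrix ((r : Int), (c : Int)) := ⟨hxin, hwall⟩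
    have hgd : (matrix.getD r []).getD c 0 ≠ 1 := by rw [← hat]; exact hwall
    rw [if_pos hgd, hbest]
    have hnl : [((r : Int) + 1, (c : Int)), ((r : Int) - 1, (c : Int)),
        ((r : Int), (c : Int) + 1), ((r : Int), (c : Int) - 1)]
        = pvNbrs ((r : Int), (c : Int)) := rfl
    rw [hnl, pvFoldl_cand]
    set cands := (pvNbrs ((r : Int), (c : Int))).filterMap (fun nb =>
      if 0 ≤ nb.1 ∧ nb.1 < (matrix.length : Int) ∧ 0 ≤ nb.2 ∧ nb.2 < ((pvWd matrix : Nat) : Int) then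
        (((pvGrid matrix p k).getD nb.1.toNat []).getD nb.2.toNat none).map (fun v => v + 1)
      else none) with hcands
    have hcand_mem : ∀ w : Int, w ∈ cands ↔ ∃ nb ∈ pvNbrs ((r : Int), (c : Int)), ∃ u : Nat,
        u ≤ k ∧ nb ∈ pvFrontN matrix u [p] [p] ∧ w = (u : Int) + 1 := by
      intro w
      rw [hcands, List.mem_filterMap]
      constructor
      · rintro ⟨nb, hnb, hsome⟩
        by_cases hgrd : 0 ≤ nb.1 ∧ nb.1 < (matrix.length : Int) ∧ 0 ≤ nb.2 ∧
            nb.2 < ((pvWd matrix : Nat) : Int)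
        · rw [if_pos hgrd] at hsome
          have hnbin : pvInR matrix nb := hgrd
          rw [hlook nb hnbin] at hsome
          cases hfd : pvFindN matrix (k + 1) [p] [p] nb with
          | none => rw [hfd] at hsome; cases hsome
          | some v =>
            rw [hfd] at hsome
            simp only [Option.map_some, Option.some.injEq] at hsome
            obtain ⟨u, hu1, hu2, hu3⟩ := pvFindN_some matrix (k + 1) [p] [p] nb v hfd
            exact ⟨nb, hnb, u, by omega, hu3, by omega⟩
        · rw [if_neg hgrd] at hsome; cases hsome
      · rintro ⟨nb, hnb, u, hu, hfr, rfl⟩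
        have hnbopen := hFopen u nb hfr
        have hnbin : pvInR matrix nb := hnbopen.1
        refine ⟨nb, hnb, ?_⟩
        rw [if_pos (show 0 ≤ nb.1 ∧ nb.1 < (matrix.length : Int) ∧ 0 ≤ nb.2 ∧
            nb.2 < ((pvWd matrix : Nat) : Int) from hnbin),
          hlook nb hnbin,
          pvFindN_of_front matrix u (k + 1) [p] [p] nb hfs hfr (by omega)]
        rfl
    have hxlev : ∀ (u : Nat), (∃ nb ∈ pvNbrs ((r : Int), (c : Int)), nb ∈ pvFrontN matrix u [p] [p]) →
        ∃ j' : Nat, j' ≤ u + 1 ∧ ((r : Int), (c : Int)) ∈ pvFrontN matrix j' [p] [p] := by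
      rintro u ⟨nb, hnb, hfr⟩
      have hseen := pvStep_seen matrix u [p] [p] ((r : Int), (c : Int)) nb hx hfr
        ((pvNbrs_symm ((r : Int), (c : Int)) nb).1 hnb)
      rcases (pvMem_seenN_iff matrix (u + 1) [p] [p] hfs _).1 hseen with hin | ⟨j', hj', hxf⟩
      · exact ⟨0, by omega, hin⟩
      · exact ⟨j', hj', hxf⟩
    cases hE : pvFindN matrix (k + 1) [p] [p] ((r : Int), (c : Int)) with
    | some j =>
      obtain ⟨v, hv1, hv2, hv3⟩ := pvFindN_some matrix (k + 1) [p] [p] _ j hE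
      have hR : pvFindN matrix (k + 2) [p] [p] ((r : Int), (c : Int)) = some j := by
        rw [pvFindN_of_front matrix v (k + 2) [p] [p] _ hfs hv3 (by omega), hv1]
      rw [hR]
      apply pvMergeF_eq (Or.inl rfl)
      · intro w hw
        simp only [Option.some.injEq] at hw
        omega
      · intro w hw
        obtain ⟨nb, hnb, u, hu, hfr, rfl⟩ := (hcand_mem w).1 hw
        obtain ⟨j', hj', hxf⟩ := hxlev u ⟨nb, hnb, hfr⟩
        have hjv : j' = v := pvFrontN_disjoint matrix [p] [p] hfs j' v _ hxf hv3
        omega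
    | none =>
      have hnotf : ∀ j' ≤ k, ((r : Int), (c : Int)) ∉ pvFrontN matrix j' [p] [p] := by
        intro j' hj' hxf
        have := pvFindN_of_front matrix j' (k + 1) [p] [p] _ hfs hxf (by omega)
        rw [hE] at this
        cases this
      by_cases hx1 : ((r : Int), (c : Int)) ∈ pvFrontN matrix (k + 1) [p] [p]
      · have hR : pvFindN matrix (k + 2) [p] [p] ((r : Int), (c : Int)) = some ((k : Int) + 1) := by
          rw [pvFindN_of_front matrix (k + 1) (k + 2) [p] [p] _ hfs hx1 (by omega)]
          congr 1
        rw [hR]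
        rw [pvFrontN_succ] at hx1
        obtain ⟨ho, hns, nb, hnbF, hnbx⟩ := (pvMem_extF matrix _ _ _).1 hx1
        apply pvMergeF_eq
        · exact Or.inr ((hcand_mem _).2 ⟨nb, (pvNbrs_symm nb _).1 hnbx, k, le_refl _, hnbF, rfl⟩)
        · intro w hw
          cases hw
        · intro w hw
          obtain ⟨nb', hnb', u, hu, hfr, rfl⟩ := (hcand_mem w).1 hw
          obtain ⟨j', hj', hxf⟩ := hxlev u ⟨nb', hnb', hfr⟩
          by_cases hjk : j' ≤ k
          · exact absurd hxf (hnotf j' hjk)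
          · omega
      · have hR : pvFindN matrix (k + 2) [p] [p] ((r : Int), (c : Int)) = none := by
          apply pvFindN_none
          intro j' hj'
          by_cases hjk : j' ≤ k
          · exact hnotf j' hjk
          · have : j' = k + 1 := by omega
            subst this
            exact hx1
        rw [hR]
        have hcnil : cands = [] := by
          rw [List.eq_nil_iff_forall_not_mem]
          intro w hw
          obtain ⟨nb', hnb', u, hu, hfr, rfl⟩ := (hcand_mem _).1 hw
          obtain ⟨j', hj', hxf⟩ := hxlev u ⟨nb', hnb', hfr⟩
          by_cases hjk : j' ≤ k
          · exact absurd hxf (hnotf j' hjk)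
          · have : j' = k + 1 := by omega
            subst this
            exact hx1 hxf
        rw [hcnil]
        rfl

theorem pvRound_eq (matrix : List (List Int)) (p : Int × Int) (hp : pvOpen matrix p) (k : Nat) :
    pvB_round matrix matrix.length (pvWd matrix) (pvGrid matrix p k) = pvGrid matrix p (k + 1) := by
  refine List.ext_getElem? ?_
  intro i
  by_cases hi : i < matrix.length
  · rw [show (pvB_round matrix matrix.length (pvWd matrix) (pvGrid matrix p k))[i]?
        = some ((List.range (pvWd matrix)).map (fun c =>
          pvB_cell matrix matrix.length (pvWd matrix) (pvGrid matrix p k) i c)) by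
      unfold pvB_round; rw [pvMapRange_getElem?, if_pos hi]]
    rw [show (pvGrid matrix p (k + 1))[i]? = some ((List.range (pvWd matrix)).map (fun (c : Nat) =>
        pvFindN matrix (k + 1 + 1) [p] [p] ((i : Int), (c : Int)))) by
      unfold pvGrid; rw [pvMapRange_getElem?, if_pos hi]]
    simp only [Option.some.injEq]
    refine List.map_congr_left ?_
    intro j hj
    rw [pvCell_find matrix p hp k i j hi (List.mem_range.1 hj)]
  · rw [show (pvB_round matrix matrix.length (pvWd matrix) (pvGrid matrix p k))[i]? = none by
      unfold pvB_round; rw [pvMapRange_getElem?, if_neg hi]]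
    rw [show (pvGrid matrix p (k + 1))[i]? = none by
      unfold pvGrid; rw [pvMapRange_getElem?, if_neg hi]]

theorem pvGrid_stab (matrix : List (List Int)) (p : Int × Int) (k m : Nat)
    (h : pvFrontN matrix k [p] [p] = []) (hkm : k ≤ m) :
    pvGrid matrix p m = pvGrid matrix p k := by
  unfold pvGrid
  refine List.map_congr_left ?_
  intro r _
  refine List.map_congr_left ?_
  intro c _
  rw [pvFindN_stable matrix k (m + 1) [p] [p] _ h (by omega),
    pvFindN_stable matrix k (k + 1) [p] [p] _ h (by omega)]

theorem pvRound_fix_front (matrix : List (List Int)) (p : Int × Int) (hp : pvOpen matrix p)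
    (k : Nat) (h : pvGrid matrix p (k + 1) = pvGrid matrix p k) :
    pvFrontN matrix (k + 1) [p] [p] = [] := by
  by_contra hne
  obtain ⟨x, hxF⟩ := List.exists_mem_of_ne_nil _ hne
  have hbase : ∀ y ∈ ([p] : List (Int × Int)), pvOpen matrix y := by
    intro y hy; rcases List.mem_singleton.1 hy with rfl; exact hp
  have hfs : ([p] : List (Int × Int)) ⊆ [p] := fun y hy => hy
  have hxopen := pvFrontN_open matrix (k + 1) [p] [p] hbase x hxF
  have hxin := hxopen.1
  simp only [pvInR] at hxin
  have hr : x.1.toNat < matrix.length := by omega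
  have hc : x.2.toNat < pvWd matrix := by omega
  have hxeq : ((x.1.toNat : Int), (x.2.toNat : Int)) = x :=
    Prod.ext (Int.toNat_of_nonneg hxin.1) (Int.toNat_of_nonneg hxin.2.2.1)
  have h1 : pvFindN matrix (k + 2) [p] [p] x = some ((k : Int) + 1) := by
    rw [pvFindN_of_front matrix (k + 1) (k + 2) [p] [p] x hfs hxF (by omega)]
    congr 1
  have h2 : pvFindN matrix (k + 1) [p] [p] x = none := by
    apply pvFindN_none
    intro j hj hxj
    have hns := pvMem_frontN_succ_not_seen matrix k [p] [p] x hxF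
    exact hns (pvSeenN_mono matrix [p] [p] j k (by omega)
      (pvFrontN_subset_seenN matrix j [p] [p] hfs hxj))
  have he := congrArg (fun g => (g.getD x.1.toNat []).getD x.2.toNat none) h
  simp only at he
  rw [pvGrid_lookup matrix p (k + 1) _ _ hr hc, pvGrid_lookup matrix p k _ _ hr hc] at he
  rw [hxeq] at he
  rw [h1, h2] at he
  cases he

theorem pvRelax_eval (matrix : List (List Int)) (p : Int × Int) (hp : pvOpen matrix p) :
    ∀ (f k : Nat), k ≤ matrix.length * pvWd matrix →
      matrix.length * pvWd matrix + 1 ≤ k + f →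
      pvB_relax matrix matrix.length (pvWd matrix) f (pvGrid matrix p k)
        = pvGrid matrix p (matrix.length * pvWd matrix) := by
  intro f
  induction f with
  | zero =>
    intro k hk hfk
    exfalso
    omega
  | succ f ih =>
    intro k hk hfk
    rw [show pvB_relax matrix matrix.length (pvWd matrix) (f + 1) (pvGrid matrix p k)
        = if pvB_round matrix matrix.length (pvWd matrix) (pvGrid matrix p k) = pvGrid matrix p k
          then pvGrid matrix p k
          else pvB_relax matrix matrix.length (pvWd matrix) f
            (pvB_round matrix matrix.length (pvWd matrix) (pvGrid matrix p k)) from rfl]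
    rw [pvRound_eq matrix p hp k]
    by_cases hstop : pvGrid matrix p (k + 1) = pvGrid matrix p k
    · rw [if_pos hstop]
      have hF := pvRound_fix_front matrix p hp k hstop
      by_cases hkM : k = matrix.length * pvWd matrix
      · rw [hkM]
      · have hle : k + 1 ≤ matrix.length * pvWd matrix := by omega
        rw [pvGrid_stab matrix p (k + 1) (matrix.length * pvWd matrix) hF hle, hstop]
    · rw [if_neg hstop]
      have hklt : k < matrix.length * pvWd matrix := by
        rcases Nat.lt_or_ge k (matrix.length * pvWd matrix) with h' | h'
        · exact h'
        · exfalso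
          have hkM : k = matrix.length * pvWd matrix := by omega
          subst hkM
          have hFM := pvFrontN_M_empty matrix p hp.1
          exact hstop (pvGrid_stab matrix p (matrix.length * pvWd matrix)
            (matrix.length * pvWd matrix + 1) hFM (by omega))
      exact ih (k + 1) (by omega) (by omega)

theorem pvTable_eq (matrix : List (List Int)) (p : Int × Int) (hp : pvOpen matrix p) :
    pvB_table matrix matrix.length (pvWd matrix) p
      = pvGrid matrix p (matrix.length * pvWd matrix) := by
  unfold pvB_table
  rw [pvInit_eq_grid matrix p hp.1]
  exact pvRelax_eval matrix p hp (matrix.length * pvWd matrix + 1) 0 (by omega) (by omega)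

-- ===== bridging B's table entries to A's trace =====

def pvEntry (matrix : List (List Int)) (p : Int × Int) (x : Int × Int) : Option Int :=
  pvFindN matrix (matrix.length * pvWd matrix + 1) [p] [p] x

theorem pvEntry_isSome_iff (matrix : List (List Int)) (p : Int × Int) (hp : pvOpen matrix p)
    (x : Int × Int) :
    (pvEntry matrix p x).isSome = true ↔ x ∈ (pvTraceP matrix p).map pvTKey := by
  have hfs : ([p] : List (Int × Int)) ⊆ [p] := fun y hy => hy
  have hM := pvFrontN_M_empty matrix p hp.1
  have htr := pvTraceP_lvl matrix p hp.1
  constructor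
  · intro hs
    obtain ⟨j, hj⟩ := Option.isSome_iff_exists.1 hs
    obtain ⟨u, hu1, hu2, hu3⟩ := pvFindN_some matrix _ [p] [p] x j hj
    have huM : u < matrix.length * pvWd matrix := by
      rcases Nat.lt_or_ge u (matrix.length * pvWd matrix) with h' | h'
      · exact h'
      · exfalso
        have hE : pvFrontN matrix u [p] [p] = [] :=
          pvFrontN_empty_mono matrix [p] [p] _ u hM h'
        rw [hE] at hu3
        cases hu3
    rw [htr]
    refine List.mem_map.2 ⟨(x.1, x.2, (u : Int)), ?_, by simp [pvTKey]⟩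
    exact (pvMem_lvlTrace matrix _ [p] [p] 0 x (u : Int)).2 ⟨u, huM, hu3, by omega⟩
  · intro hk
    rw [htr] at hk
    obtain ⟨t, ht, hkey⟩ := List.mem_map.1 hk
    obtain ⟨a, b, v⟩ := t
    have hkey' : (a, b) = x := hkey
    obtain ⟨u, hu, hf, hv⟩ := (pvMem_lvlTrace matrix _ [p] [p] 0 ((a, b)) v).1 ht
    rw [show x = (a, b) from hkey'.symm]
    unfold pvEntry
    rw [pvFindN_of_front matrix u _ [p] [p] (a, b) hfs hf (by omega)]
    rfl

theorem pvEntry_val (matrix : List (List Int)) (p : Int × Int) (hp : pvOpen matrix p)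
    (x : Int × Int) (v : Int) (h : pvEntry matrix p x = some v) :
    pvTsum (pvTraceP matrix p) x = v := by
  have hfs : ([p] : List (Int × Int)) ⊆ [p] := fun y hy => hy
  have hM := pvFrontN_M_empty matrix p hp.1
  have htr := pvTraceP_lvl matrix p hp.1
  obtain ⟨u, hu1, hu2, hu3⟩ := pvFindN_some matrix _ [p] [p] x v h
  have huM : u < matrix.length * pvWd matrix := by
    rcases Nat.lt_or_ge u (matrix.length * pvWd matrix) with h' | h'
    · exact h'
    · exfalso
      have hE : pvFrontN matrix u [p] [p] = [] :=
        pvFrontN_empty_mono matrix [p] [p] _ u hM h'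
      rw [hE] at hu3
      cases hu3
  have hmem : (x.1, x.2, (u : Int)) ∈ pvTraceP matrix p := by
    rw [htr]
    exact (pvMem_lvlTrace matrix _ [p] [p] 0 x (u : Int)).2 ⟨u, huM, hu3, by omega⟩
  refine pvSum_filter_nodup (pvTraceP matrix p) x (pvTraceP_inv matrix p hp.1).1 ?_ v ?_
  · exact List.mem_map.2 ⟨(x.1, x.2, (u : Int)), hmem, by simp [pvTKey]⟩
  · refine List.mem_map.2 ⟨(x.1, x.2, (u : Int)), hmem, ?_⟩
    simp [pvTKey, pvTVal]
    omega

-- ===== final assembly =====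

theorem pvCell_eq (matrix : List (List Int))
    (hrect : ∀ row ∈ matrix, row.length = pvWd matrix)
    (i j : Nat) (hi : i < matrix.length) (hj : j < pvWd matrix) :
    (if (pvGC (pvMFin matrix) i j).2 = ((pvPeople matrix).length : Int) then
      some (pvGC (pvMFin matrix) i j).1 else none) =
    (if ((pvPeople matrix).map (fun p => pvEntry matrix p ((i : Int), (j : Int)))).all
        (fun e => e.isSome) then
      some ((((pvPeople matrix).map (fun p => pvEntry matrix p ((i : Int), (j : Int)))).map
        (fun e => e.getD 0)).sum)
    else none) := by
  have hGC := pvGC_mFin matrix hrect i j hi hj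
  rw [hGC]
  have hall : (((pvPeople matrix).map (fun p => pvEntry matrix p ((i : Int), (j : Int)))).all
      (fun e => e.isSome) = true)
      ↔ ∀ p ∈ pvPeople matrix, ((i : Int), (j : Int)) ∈ (pvTraceP matrix p).map pvTKey := by
    rw [List.all_map, List.all_eq_true]
    refine forall_congr' fun p => ?_
    refine forall_congr' fun hp => ?_
    exact pvEntry_isSome_iff matrix p (pvPeople_open matrix p hp) _
  have hbound : ∀ p ∈ pvPeople matrix,
      pvTcnt (pvTraceP matrix p) ((i : Int), (j : Int)) = 0 ∨
      pvTcnt (pvTraceP matrix p) ((i : Int), (j : Int)) = 1 := by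
    intro p hp
    rw [pvTcnt_nodup _ _ (pvTraceP_inv matrix p (pvPeople_inR matrix p hp)).1]
    split_ifs <;> simp
  have hcnt : (((pvPeople matrix).map
      (fun p => pvTcnt (pvTraceP matrix p) ((i : Int), (j : Int)))).sum
      = ((pvPeople matrix).length : Int))
      ↔ ∀ p ∈ pvPeople matrix, ((i : Int), (j : Int)) ∈ (pvTraceP matrix p).map pvTKey := by
    rw [pvSum_ones_iff (pvPeople matrix) _ hbound]
    refine forall_congr' fun p => ?_
    refine forall_congr' fun hp => ?_
    rw [pvTcnt_nodup _ _ (pvTraceP_inv matrix p (pvPeople_inR matrix p hp)).1]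
    constructor
    · intro h1
      by_contra hmem
      rw [if_neg hmem] at h1
      exact absurd h1 (by norm_num)
    · intro hmem; rw [if_pos hmem]
  by_cases hc : ∀ p ∈ pvPeople matrix, ((i : Int), (j : Int)) ∈ (pvTraceP matrix p).map pvTKey
  · rw [if_pos (hcnt.2 hc), if_pos (hall.2 hc)]
    have hsum : ((pvPeople matrix).map (fun p => pvEntry matrix p ((i : Int), (j : Int)))).map
        (fun e => e.getD 0)
        = (pvPeople matrix).map
          (fun p => pvTsum (pvTraceP matrix p) ((i : Int), (j : Int))) := by
      rw [List.map_map]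
      refine List.map_congr_left fun p hp => ?_
      have hos : (pvEntry matrix p ((i : Int), (j : Int))).isSome = true :=
        (pvEntry_isSome_iff matrix p (pvPeople_open matrix p hp) _).2 (hc p hp)
      obtain ⟨v, hv⟩ := Option.isSome_iff_exists.1 hos
      show (pvEntry matrix p ((i : Int), (j : Int))).getD 0 = _
      rw [hv]
      exact (pvEntry_val matrix p (pvPeople_open matrix p hp) _ v hv).symm
    rw [hsum]
  · rw [if_neg (fun H => hc (hcnt.1 H)), if_neg (fun H => hc (hall.1 H))]

theorem pvCands_eq (matrix : List (List Int))
    (hrect : ∀ row ∈ matrix, row.length = pvWd matrix) :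
    ((pvMFin matrix).flatMap (fun row =>
      row.filterMap (fun cell =>
        if cell.2 = ((pvPeople matrix).length : Int) then some cell.1 else none)))
    = ((PySem.List.pyRange 0 (matrix.length : Int) 1).flatMap (fun r =>
        (PySem.List.pyRange 0 ((PySem.List.pyGetD matrix 0 []).length : Int) 1).filterMap (fun c =>
          if ((pvPeople matrix).map (fun p =>
              pvB_table matrix matrix.length (pvWd matrix) p)).all
              (fun t => ((t.getD r.toNat []).getD c.toNat none).isSome) then
            some ((((pvPeople matrix).map (fun p =>
              pvB_table matrix matrix.length (pvWd matrix) p)).map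
              (fun t => ((t.getD r.toNat []).getD c.toNat none).getD 0)).sum)
          else none))) := by
  rw [pvRows_eq matrix (pvMFin matrix) (pvShape_mFin matrix hrect)]
  rw [List.flatMap_map]
  have hpr : PySem.List.pyRange 0 (matrix.length : Int) 1
      = List.map (fun k : Nat => (k : Int)) (List.range matrix.length) :=
    PySem.List.pyRange_zero_nat matrix.length
  have hpc : PySem.List.pyRange 0 ((PySem.List.pyGetD matrix 0 []).length : Int) 1
      = List.map (fun k : Nat => (k : Int)) (List.range (pvWd matrix)) :=
    PySem.List.pyRange_zero_nat (pvWd matrix)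
  rw [hpr, hpc, List.flatMap_map]
  refine List.flatMap_congr fun i hi => ?_
  have hi' : i < matrix.length := List.mem_range.1 hi
  rw [List.filterMap_map, List.filterMap_map]
  refine List.filterMap_congr fun j hj => ?_
  have hj' : j < pvWd matrix := List.mem_range.1 hj
  have htab : (pvPeople matrix).map (fun p => pvB_table matrix matrix.length (pvWd matrix) p)
      = (pvPeople matrix).map (fun p => pvGrid matrix p (matrix.length * pvWd matrix)) :=
    List.map_congr_left (fun p hp => pvTable_eq matrix p (pvPeople_open matrix p hp))
  have hlook : ∀ p : Int × Int,
      (((pvGrid matrix p (matrix.length * pvWd matrix)).getD ((i : Int)).toNat []).getD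
        ((j : Int)).toNat none) = pvEntry matrix p ((i : Int), (j : Int)) := by
    intro p
    have h1 : ((i : Int)).toNat = i := Int.toNat_natCast i
    have h2 : ((j : Int)).toNat = j := Int.toNat_natCast j
    rw [h1, h2, pvGrid_lookup matrix p _ i j hi' hj']
    rfl
  have hcomp := pvCell_eq matrix hrect i j hi' hj'
  simp only [Function.comp_def, htab, List.all_map, List.map_map, hlook]
  simp only [Function.comp_def, List.all_map] at hcomp ⊢
  simpa using hcomp

-- ===== VERDICT (by name: the statement is the Claim_ definition above) =====
theorem solve_spec : Claim_equal_solve := by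
  intro matrix _ hpre
  have hrect : ∀ row ∈ matrix, row.length = pvWd matrix := by
    have hh : PySem.List.pyGetD matrix 0 [] = matrix.headD [] := by
      cases matrix <;> simp [PySem.List.pyGetD_zero]
    intro row hrow
    have := hpre.1 row hrow
    simpa [pvWd, hh] using this
  show solve matrix = solve_alt matrix
  simp only [solve, solve_alt]
  rw [pvResA_eq matrix]
  simp only []
  rw [pvCands_eq matrix hrect]
  rfl
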